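-- pv_equiv track=rewrite | github.com/ctroy978/edmpc | edmcp-editcheck/edmcp_editcheck/core/diff_analyzer.py | _added_chars
-- ===== SOURCE A (Python) =====
-- import difflib
--
-- def _added_chars(old: str, new: str) -> tuple[int, str]:
--     """Return (chars_added, first_insertion_snippet)."""
--     matcher = difflib.SequenceMatcher(None, old, new, autojunk=False)
--     added = 0
--     first_snippet = ""
--     for tag, i1, i2, j1, j2 in matcher.get_opcodes():
--         if tag in ("insert", "replace"):
--             chunk = new[j1:j2]
--             added += len(chunk)
--             if not first_snippet:
--                 first_snippet = chunk
--     return added, first_snippet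
-- ===== SOURCE B (Python) =====
-- def _blocks(old: str, new: str, alo: int, ahi: int, blo: int, bhi: int, out: list) -> None:
--     """Recursively emit (in order) the matching blocks of the region, difflib-style:
--     take the leftmost longest common substring (maximal k, then minimal i, then
--     minimal j), recurse left of it, emit it, recurse right of it."""
--     bi, bj, bk = alo, blo, 0
--     for i in range(alo, ahi):
--         if ahi - i <= bk:        # no run starting here can beat bk
--             break
--         for j in range(blo, bhi):
--             if bhi - j <= bk:    # no run starting here can beat bk
--                 break
--             if old[i] != new[j]:
--                 continue
--             k = 1
--             while i + k < ahi and j + k < bhi and old[i + k] == new[j + k]: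
--                 k += 1
--             if k > bk:
--                 bi, bj, bk = i, j, k
--     if bk:
--         _blocks(old, new, alo, bi, blo, bj, out)
--         out.append((bi, bj, bk))
--         _blocks(old, new, bi + bk, ahi, bj + bk, bhi, out)
--
--
-- def _added_chars(old: str, new: str) -> tuple[int, str]:
--     """Return (chars_added, first_insertion_snippet)."""
--     blocks = []
--     _blocks(old, new, 0, len(old), 0, len(new), blocks)
--     blocks.append((len(old), len(new), 0))  # terminating block
--     added = len(new) - sum(n for _i, _j, n in blocks)
--     first_snippet = ""
--     end = 0
--     for _i, j, n in blocks:
--         if j > end: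
--             first_snippet = new[end:j]
--             break
--         end = j + n
--     return added, first_snippet
-- ===== Notes on version B (the rewrite author's own statement) =====
-- stated objective: alternative
-- what changed: B drops difflib entirely: a self-contained recursive greedy decomposition that finds the leftmost longest common substring of each region by direct scanning with early-exit pruning (no per-character index, no rolling DP dictionaries, no work queue, no sort, no adjacent-block merge), emits the blocks in order, computes the added count by the closed form len(new) minus total matched size, and finds the first snippet with a break-on-first-gap scan instead of A's tag dispatch over get_opcodes.
import Mathlib
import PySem

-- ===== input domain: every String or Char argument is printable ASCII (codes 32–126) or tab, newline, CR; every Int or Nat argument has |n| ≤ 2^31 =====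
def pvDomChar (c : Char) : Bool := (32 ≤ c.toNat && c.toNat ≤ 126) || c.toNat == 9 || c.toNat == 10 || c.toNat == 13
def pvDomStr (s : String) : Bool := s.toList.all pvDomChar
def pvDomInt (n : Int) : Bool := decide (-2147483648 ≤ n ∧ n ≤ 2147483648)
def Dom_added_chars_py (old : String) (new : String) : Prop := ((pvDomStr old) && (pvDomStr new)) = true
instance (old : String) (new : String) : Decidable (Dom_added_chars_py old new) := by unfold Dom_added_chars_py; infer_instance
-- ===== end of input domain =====

-- B drops difflib entirely: a recursive greedy decomposition that finds the leftmost
-- longest common substring by direct scanning (no char index, no DP rows, no queue/sort/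
-- merge), then a closed form for the count and an early-exit scan for the first snippet.

-- ===== SHARED matching-blocks machinery =====
-- Both Pythons call difflib.SequenceMatcher(None, old, new, autojunk=False); its
-- get_matching_blocks computation (CPython's, with isjunk=None and autojunk=False, so the
-- junk/popular sets are empty and the junk tests are constant False) is ported once here
-- and used by both ports (A then derives the opcodes from the blocks, exactly as difflib does).

-- __chain_b: b2j[elt] = ascending list of indices of elt in b  (junk/popular pruning is vacuous)
def dlB2j (b : List Char) : PySem.Dict Char (List Nat) :=
  (List.range b.length).foldl (fun d i => d.modify (b.getD i ' ') [] (· ++ [i])) PySem.Dict.empty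

-- the inner 'for j in b2j.get(a[i], nothing)' loop of find_longest_match, with its
-- continue (j < blo) and break (j >= bhi); state = (newj2len, besti, bestj, bestsize).
-- j2len keys are Int because Python reads j2len.get(j-1, 0) where j-1 may be -1.
def dlRow (blo bhi i : Nat) (j2len : PySem.Dict Int Nat) :
    List Nat → PySem.Dict Int Nat × Nat × Nat × Nat → PySem.Dict Int Nat × Nat × Nat × Nat
  | [], st => st
  | j :: js, (nj, besti, bestj, bestsize) =>
    if j < blo then dlRow blo bhi i j2len js (nj, besti, bestj, bestsize)
    else if bhi ≤ j then (nj, besti, bestj, bestsize)   -- break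
    else
      let k := j2len.getD ((j : Int) - 1) 0 + 1
      let nj' := nj.insert (j : Int) k
      if bestsize < k then dlRow blo bhi i j2len js (nj', i + 1 - k, j + 1 - k, k)
      else dlRow blo bhi i j2len js (nj', besti, bestj, bestsize)

-- the outer 'for i in range(alo, ahi)' loop (each row starts a fresh newj2len)
def dlRows (a : List Char) (b2j : PySem.Dict Char (List Nat)) (blo bhi : Nat)
    (is : List Nat) (st : PySem.Dict Int Nat × Nat × Nat × Nat) :
    PySem.Dict Int Nat × Nat × Nat × Nat :=
  is.foldl (fun st i =>
    dlRow blo bhi i st.1 (b2j.getD (a.getD i ' ') []) (PySem.Dict.empty, st.2)) st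

-- 'while besti > alo and bestj > blo and a[besti-1] == b[bestj-1]' (junk test is False)
def dlExtL (a b : List Char) (alo blo : Nat) (besti bestj bestsize : Nat) : Nat × Nat × Nat :=
  if alo < besti ∧ blo < bestj ∧ a.getD (besti - 1) ' ' = b.getD (bestj - 1) ' ' then
    dlExtL a b alo blo (besti - 1) (bestj - 1) (bestsize + 1)
  else (besti, bestj, bestsize)
termination_by besti
decreasing_by omega

-- 'while besti+bestsize < ahi and bestj+bestsize < bhi and a[besti+bestsize] == b[bestj+bestsize]'
def dlExtR (a b : List Char) (ahi bhi : Nat) (besti bestj bestsize : Nat) : Nat :=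
  if besti + bestsize < ahi ∧ bestj + bestsize < bhi ∧
      a.getD (besti + bestsize) ' ' = b.getD (bestj + bestsize) ' ' then
    dlExtR a b ahi bhi besti bestj (bestsize + 1)
  else bestsize
termination_by ahi - (besti + bestsize)
decreasing_by omega

-- find_longest_match(alo, ahi, blo, bhi)
def dlFLM (a b : List Char) (b2j : PySem.Dict Char (List Nat)) (alo ahi blo bhi : Nat) :
    Nat × Nat × Nat :=
  let r := dlRows a b2j blo bhi (List.range' alo (ahi - alo)) (PySem.Dict.empty, alo, blo, 0)
  let e := dlExtL a b alo blo r.2.1 r.2.2.1 r.2.2.2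
  (e.1, e.2.1, dlExtR a b ahi bhi e.1 e.2.1 e.2.2)

-- the 'while queue' loop of get_matching_blocks; the queue's head is Python's list end
-- (queue.pop()); fuel 2*len(a)+2 bounds the iterations (measure 2*Σ(ahi-alo)+|queue|
-- strictly decreases each pop), so it is never exhausted — a totality guard, not a switch.
def dlQueue (a b : List Char) (b2j : PySem.Dict Char (List Nat)) :
    Nat → List (Nat × Nat × Nat × Nat) → List (Nat × Nat × Nat) → List (Nat × Nat × Nat)
  | 0, _, acc => acc
  | _ + 1, [], acc => acc
  | fuel + 1, (alo, ahi, blo, bhi) :: q, acc =>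
    let x := dlFLM a b b2j alo ahi blo bhi
    if x.2.2 ≠ 0 then
      let q1 := if alo < x.1 ∧ blo < x.2.1 then [(alo, x.1, blo, x.2.1)] else []
      let q2 := if x.1 + x.2.2 < ahi ∧ x.2.1 + x.2.2 < bhi then
                  [(x.1 + x.2.2, ahi, x.2.1 + x.2.2, bhi)] else []
      dlQueue a b b2j fuel (q2 ++ q1 ++ q) (acc ++ [x])
    else dlQueue a b b2j fuel q acc

-- strict lexicographic < on (i, j, k) triples, Python's tuple order
def dlLexLt (p q : Nat × Nat × Nat) : Bool :=
  p.1 < q.1 ∨ (p.1 = q.1 ∧ (p.2.1 < q.2.1 ∨ (p.2.1 = q.2.1 ∧ p.2.2 < q.2.2)))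

-- blocks.sort(): Python's stable sort, ported as a stable insertion sort over dlLexLt
def dlSort (xs : List (Nat × Nat × Nat)) : List (Nat × Nat × Nat) :=
  xs.foldl (fun acc x => PySem.List.insertBy dlLexLt x acc) []

-- the adjacent-block merge loop of get_matching_blocks, state (i1, j1, k1) starting (0,0,0)
def dlMerge : List (Nat × Nat × Nat) → Nat → Nat → Nat → List (Nat × Nat × Nat)
  | [], i1, j1, k1 => if k1 ≠ 0 then [(i1, j1, k1)] else []
  | (i2, j2, k2) :: rest, i1, j1, k1 =>
    if i1 + k1 = i2 ∧ j1 + k1 = j2 then dlMerge rest i1 j1 (k1 + k2)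
    else (if k1 ≠ 0 then [(i1, j1, k1)] else []) ++ dlMerge rest i2 j2 k2

-- get_matching_blocks()
def dlMatchingBlocks (a b : List Char) : List (Nat × Nat × Nat) :=
  let b2j := dlB2j b
  let mb := dlQueue a b b2j (2 * a.length + 2) [(0, a.length, 0, b.length)] []
  dlMerge (dlSort mb) 0 0 0 ++ [(a.length, b.length, 0)]

-- ===== PORT A =====
-- get_opcodes(): walk the matching blocks with state (i, j) producing tagged opcodes
def dlOpcodes : List (Nat × Nat × Nat) → Nat → Nat → List (String × Nat × Nat × Nat × Nat)
  | [], _, _ => []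
  | (ai, bj, size) :: rest, i, j =>
    let tag : String :=
      if i < ai ∧ j < bj then "replace"
      else if i < ai then "delete"
      else if j < bj then "insert"
      else ""
    (if tag ≠ "" then [(tag, i, ai, j, bj)] else []) ++
    (if size ≠ 0 then [("equal", ai, ai + size, bj, bj + size)] else []) ++
    dlOpcodes rest (ai + size) (bj + size)

-- the body of A's 'for tag, i1, i2, j1, j2 in matcher.get_opcodes()' loop
def stepA (new : List Char) (st : Int × List Char) (op : String × Nat × Nat × Nat × Nat) :
    Int × List Char :=
  if op.1 = "insert" ∨ op.1 = "replace" then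
    let chunk := PySem.List.slice new (some (op.2.2.2.1 : Int)) (some (op.2.2.2.2 : Int))
    (st.1 + chunk.length, if st.2 = [] then chunk else st.2)
  else st

def added_chars_py (old : String) (new : String) : Int × String :=
  let r := (dlOpcodes (dlMatchingBlocks old.toList new.toList) 0 0).foldl
            (stepA new.toList) (0, [])
  (r.1, String.ofList r.2)

-- ===== PORT B =====
-- the 'while i + k < ahi and ...' run-length loop of B
def bRun (old new : List Char) (ahi bhi i j : Nat) (k : Nat) : Nat :=
  if i + k < ahi ∧ j + k < bhi ∧ old.getD (i + k) ' ' = new.getD (j + k) ' ' then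
    bRun old new ahi bhi i j (k + 1)
  else k
termination_by ahi - (i + k)
decreasing_by omega

-- the 'for j in range(blo, bhi)' loop (break / continue / best update)
def bInner (old new : List Char) (ahi bhi i : Nat) :
    List Nat → Nat × Nat × Nat → Nat × Nat × Nat
  | [], st => st
  | j :: js, (bi, bj, bk) =>
    if bhi - j ≤ bk then (bi, bj, bk)   -- break
    else if old.getD i ' ' ≠ new.getD j ' ' then bInner old new ahi bhi i js (bi, bj, bk)
    else
      let k := bRun old new ahi bhi i j 1
      if bk < k then bInner old new ahi bhi i js (i, j, k)
      else bInner old new ahi bhi i js (bi, bj, bk)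

-- the 'for i in range(alo, ahi)' loop
def bOuter (old new : List Char) (ahi blo bhi : Nat) :
    List Nat → Nat × Nat × Nat → Nat × Nat × Nat
  | [], st => st
  | i :: is, (bi, bj, bk) =>
    if ahi - i ≤ bk then (bi, bj, bk)   -- break
    else bOuter old new ahi blo bhi is
      (bInner old new ahi bhi i (List.range' blo (bhi - blo)) (bi, bj, bk))

-- the scanning part of B's _blocks: leftmost longest common substring of the region
def bLongest (old new : List Char) (alo ahi blo bhi : Nat) : Nat × Nat × Nat :=
  bOuter old new ahi blo bhi (List.range' alo (ahi - alo)) (alo, blo, 0)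

-- bounds of the chosen block (needed for bBlocks' termination)
lemma bRun_bounds (old new : List Char) (ahi bhi i j : Nat) :
    ∀ (fk k : Nat), fk = ahi - (i + k) →
      (i + k ≤ ahi ∧ j + k ≤ bhi) ∨ k = 1 →
      (let r := bRun old new ahi bhi i j k
       k ≤ r ∧ ((i + r ≤ ahi ∧ j + r ≤ bhi) ∨ r = 1)) := by
  intro fk
  induction fk using Nat.strong_induction_on with
  | _ fk ih =>
    intro k hfk h
    rw [bRun]
    split_ifs with hc
    · have := ih (ahi - (i + (k + 1))) (by omega) (k + 1) rfl (Or.inl (by omega))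
      exact ⟨by omega, this.2⟩
    · exact ⟨le_refl _, h⟩

lemma bInner_bounds (old new : List Char) (alo ahi blo bhi i : Nat) (hi : i < ahi)
    (halo : alo ≤ i) :
    ∀ (js : List Nat) (st : Nat × Nat × Nat),
      (∀ j ∈ js, blo ≤ j ∧ j < bhi) →
      (st.2.2 ≠ 0 → st.1 + st.2.2 ≤ ahi ∧ st.2.1 + st.2.2 ≤ bhi ∧ alo ≤ st.1 ∧ blo ≤ st.2.1) →
      (let r := bInner old new ahi bhi i js st
       r.2.2 ≠ 0 → r.1 + r.2.2 ≤ ahi ∧ r.2.1 + r.2.2 ≤ bhi ∧ alo ≤ r.1 ∧ blo ≤ r.2.1) := by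
  intro js
  induction js with
  | nil => intro st _ h; exact h
  | cons j js ih =>
    intro st hjs h
    obtain ⟨bi, bj, bk⟩ := st
    rw [bInner]
    dsimp only
    split_ifs with h1 h2 h3
    · exact h
    · exact ih (bi, bj, bk) (fun x hx => hjs x (List.mem_cons_of_mem _ hx)) h
    · have hj := hjs j (List.mem_cons_self ..)
      have hr := bRun_bounds old new ahi bhi i j (ahi - (i + 1)) 1 rfl (Or.inr rfl)
      apply ih (i, j, bRun old new ahi bhi i j 1)
        (fun x hx => hjs x (List.mem_cons_of_mem _ hx))
      intro _
      have hb : i + bRun old new ahi bhi i j 1 ≤ ahi ∧ j + bRun old new ahi bhi i j 1 ≤ bhi := by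
        rcases hr.2 with hb | hb
        · exact hb
        · rw [hb]; omega
      exact ⟨hb.1, hb.2, halo, hj.1⟩
    · exact ih (bi, bj, bk) (fun x hx => hjs x (List.mem_cons_of_mem _ hx)) h

lemma bLongest_bounds (old new : List Char) (alo ahi blo bhi : Nat) :
    (bLongest old new alo ahi blo bhi).2.2 ≠ 0 →
      (bLongest old new alo ahi blo bhi).1 + (bLongest old new alo ahi blo bhi).2.2 ≤ ahi ∧
      (bLongest old new alo ahi blo bhi).2.1 + (bLongest old new alo ahi blo bhi).2.2 ≤ bhi ∧
      alo ≤ (bLongest old new alo ahi blo bhi).1 ∧ blo ≤ (bLongest old new alo ahi blo bhi).2.1 := by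
  rw [bLongest]
  suffices h : ∀ (is : List Nat) (st : Nat × Nat × Nat),
      (∀ i ∈ is, alo ≤ i ∧ i < ahi) →
      (st.2.2 ≠ 0 → st.1 + st.2.2 ≤ ahi ∧ st.2.1 + st.2.2 ≤ bhi ∧ alo ≤ st.1 ∧ blo ≤ st.2.1) →
      (let r := bOuter old new ahi blo bhi is st
       r.2.2 ≠ 0 → r.1 + r.2.2 ≤ ahi ∧ r.2.1 + r.2.2 ≤ bhi ∧ alo ≤ r.1 ∧ blo ≤ r.2.1) by
    apply h
    · intro i hi
      have := List.mem_range'.mp hi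
      omega
    · intro h0
      simp at h0
  intro is
  induction is with
  | nil => intro st _ h; exact h
  | cons i is ih =>
    intro st his h
    obtain ⟨bi, bj, bk⟩ := st
    rw [bOuter]
    split_ifs with h1
    · exact h
    · apply ih _ (fun x hx => his x (List.mem_cons_of_mem _ hx))
      exact bInner_bounds old new alo ahi blo bhi i (his i (List.mem_cons_self ..)).2
        (his i (List.mem_cons_self ..)).1 (List.range' blo (bhi - blo)) (bi, bj, bk)
        (fun j hj => by have := List.mem_range'.mp hj; omega) h

-- B's recursive _blocks (the mutated 'out' list becomes the returned list)
def bBlocks (old new : List Char) (alo ahi blo bhi : Nat) : List (Nat × Nat × Nat) :=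
  match hbt : bLongest old new alo ahi blo bhi with
  | (bi, bj, bk) =>
    if h : bk ≠ 0 then
      bBlocks old new alo bi blo bj ++ [(bi, bj, bk)] ++
        bBlocks old new (bi + bk) ahi (bj + bk) bhi
    else []
termination_by ahi - alo
decreasing_by
  all_goals
    have hb := bLongest_bounds old new alo ahi blo bhi
    rw [hbt] at hb
    have h2 := hb h
    dsimp only at h2
    omega

-- 'sum(n for _i, _j, n in blocks)'
def sumSizes (bs : List (Nat × Nat × Nat)) : Nat := bs.foldl (fun s x => s + x.2.2) 0

-- B's early-exit loop: the first gap new[end:j] before a matching block (break on find)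
def firstGap (new : List Char) : List (Nat × Nat × Nat) → Nat → List Char
  | [], _ => []
  | (_, j, n) :: rest, e =>
    if e < j then PySem.List.slice new (some (e : Int)) (some (j : Int))
    else firstGap new rest (j + n)

def added_chars_py_alt (old : String) (new : String) : Int × String :=
  let blocks := bBlocks old.toList new.toList 0 old.toList.length 0 new.toList.length ++
    [(old.toList.length, new.toList.length, 0)]
  ((new.toList.length : Int) - (sumSizes blocks : Int),
   String.ofList (firstGap new.toList blocks 0))

-- ===== PRECONDITION & SPEC =====
def Spec_added_chars_py (old : String) (new : String) (out : Int × String) : Prop := out = added_chars_py_alt old new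
instance (old : String) (new : String) (out : Int × String) : Decidable (Spec_added_chars_py old new out) := by unfold Spec_added_chars_py; infer_instance

-- ===== CLAIM (what is proved, stated in full; the proofs are below) =====
def Claim_equal_added_chars_py : Prop := ∀ (old : String) (new : String), Dom_added_chars_py old new → Spec_added_chars_py old new (added_chars_py old new)

-- ===== LEMMAS AND PROOFS =====

-- regions (alo, ahi, blo, bhi); a block (i, j, k) occupies the region (i, i+k, j, j+k)
def toReg (x : Nat × Nat × Nat) : Nat × Nat × Nat × Nat := (x.1, x.1 + x.2.2, x.2.1, x.2.1 + x.2.2)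

def dlWF (lb : Nat) (r : Nat × Nat × Nat × Nat) : Prop :=
  r.1 ≤ r.2.1 ∧ r.2.2.1 ≤ r.2.2.2 ∧ r.2.2.2 ≤ lb

-- two regions are separated: one lies entirely before the other in BOTH coordinates
def dlSep (r s : Nat × Nat × Nat × Nat) : Prop :=
  (r.2.1 ≤ s.1 ∧ r.2.2.2 ≤ s.2.2.1) ∨ (s.2.1 ≤ r.1 ∧ s.2.2.2 ≤ r.2.2.1)

def dlCont (x r : Nat × Nat × Nat × Nat) : Prop :=
  r.1 ≤ x.1 ∧ x.2.1 ≤ r.2.1 ∧ r.2.2.1 ≤ x.2.2.1 ∧ x.2.2.2 ≤ r.2.2.2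

lemma dlSep_symm {r s : Nat × Nat × Nat × Nat} (h : dlSep r s) : dlSep s r := by
  rcases h with h | h
  · exact Or.inr h
  · exact Or.inl h

lemma dlSep_mono {x r s : Nat × Nat × Nat × Nat} (hc : dlCont x r) (h : dlSep r s) : dlSep x s := by
  obtain ⟨h1, h2, h3, h4⟩ := hc
  rcases h with h | h
  · exact Or.inl ⟨le_trans h2 h.1, le_trans h4 h.2⟩
  · exact Or.inr ⟨le_trans h.1 h1, le_trans h.2 h3⟩

-- dict invariant for find_longest_match: values are bounded by rows done and by j+1-blo
def dlDOK (alo blo : Nat) (i : Nat) (d : PySem.Dict Int Nat) : Prop :=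
  ∀ jj : Int, d.getD jj 0 = 0 ∨
    ((d.getD jj 0 : Int) ≤ (i : Int) - (alo : Int) ∧ (d.getD jj 0 : Int) ≤ jj + 1 - (blo : Int))

-- best-state invariant while processing row i
def dlBI (alo blo bhi i : Nat) (st : Nat × Nat × Nat) : Prop :=
  alo ≤ st.1 ∧ blo ≤ st.2.1 ∧ st.1 + st.2.2 ≤ i + 1 ∧ st.2.1 + st.2.2 ≤ bhi

lemma dlRow_inv (alo blo bhi i : Nat) (hal : alo ≤ i) (j2len : PySem.Dict Int Nat)
    (hj2 : dlDOK alo blo i j2len) :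
    ∀ (js : List Nat) (nj : PySem.Dict Int Nat) (b : Nat × Nat × Nat),
      dlDOK alo blo (i + 1) nj → dlBI alo blo bhi i b →
      dlDOK alo blo (i + 1) (dlRow blo bhi i j2len js (nj, b)).1 ∧
      dlBI alo blo bhi i (dlRow blo bhi i j2len js (nj, b)).2 := by
  intro js
  induction js with
  | nil => intro nj b hnj hb; exact ⟨hnj, hb⟩
  | cons j js ih =>
    intro nj b hnj hb
    obtain ⟨bi, bj, bk⟩ := b
    show dlDOK alo blo (i+1) (dlRow blo bhi i j2len (j :: js) (nj, bi, bj, bk)).1 ∧ _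
    rw [dlRow]
    by_cases h1 : j < blo
    · simp only [if_pos h1]; exact ih nj (bi, bj, bk) hnj hb
    · simp only [if_neg h1]
      by_cases h2 : bhi ≤ j
      · simp only [if_pos h2]; exact ⟨hnj, hb⟩
      · simp only [if_neg h2]
        have hjblo : blo ≤ j := Nat.le_of_not_lt h1
        have hjbhi : j < bhi := Nat.lt_of_not_le h2
        set k := j2len.getD ((j : Int) - 1) 0 + 1 with hk
        have hkb : (k : Int) ≤ (i : Int) - alo + 1 ∧ (k : Int) ≤ (j : Int) + 1 - blo := by
          rcases hj2 ((j : Int) - 1) with h | h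
          · constructor <;> (rw [hk, h]; push_cast; omega)
          · constructor <;> (rw [hk]; push_cast; omega)
        have hnj' : dlDOK alo blo (i + 1) (nj.insert (j : Int) k) := by
          intro jj
          rw [PySem.Dict.getD_insert]
          split_ifs with hjj
          · right
            subst hjj
            have h4 := hkb.1
            have h5 := hkb.2
            constructor <;> (push_cast; push_cast at h4 h5; omega)
          · exact hnj jj
        by_cases h3 : bk < k
        · simp only [if_pos h3]
          apply ih _ _ hnj'
          show alo ≤ i + 1 - k ∧ blo ≤ j + 1 - k ∧ (i + 1 - k) + k ≤ i + 1 ∧ (j + 1 - k) + k ≤ bhi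
          have h4 := hkb.1
          have h5 := hkb.2
          refine ⟨?_, ?_, ?_, ?_⟩ <;> omega
        · simp only [if_neg h3]
          exact ih _ _ hnj' hb

lemma dlRows_inv (a : List Char) (b2j : PySem.Dict Char (List Nat)) (alo blo bhi : Nat) :
    ∀ (n st0 : Nat) (d : PySem.Dict Int Nat) (b : Nat × Nat × Nat),
      alo ≤ st0 → dlDOK alo blo st0 d →
      (alo ≤ b.1 ∧ blo ≤ b.2.1 ∧ b.1 + b.2.2 ≤ st0 ∧ b.2.1 + b.2.2 ≤ bhi) →
      (let r := dlRows a b2j blo bhi (List.range' st0 n) (d, b)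
       alo ≤ r.2.1 ∧ blo ≤ r.2.2.1 ∧ r.2.1 + r.2.2.2 ≤ st0 + n ∧ r.2.2.1 + r.2.2.2 ≤ bhi) := by
  intro n
  induction n with
  | zero => intro st0 d b h0 hd hb; simpa [dlRows] using hb
  | succ n ih =>
    intro st0 d b h0 hd hb
    have hrw : List.range' st0 (n + 1) = st0 :: List.range' (st0 + 1) n := by
      simp [List.range'_succ]
    rw [hrw]
    show (let r := dlRows a b2j blo bhi (List.range' (st0+1) n)
            (dlRow blo bhi st0 d (b2j.getD (a.getD st0 ' ') []) (PySem.Dict.empty, b)); _)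
    have hrow := dlRow_inv alo blo bhi st0 h0 d hd (b2j.getD (a.getD st0 ' ') [])
      PySem.Dict.empty b (by intro jj; left; simp [PySem.Dict.getD_empty])
      ⟨hb.1, hb.2.1, by omega, hb.2.2.2⟩
    have := ih (st0 + 1) _ _ (by omega) hrow.1
      ⟨hrow.2.1, hrow.2.2.1, hrow.2.2.2.1, hrow.2.2.2.2⟩
    simpa [dlRows, Nat.add_comm, Nat.add_assoc, Nat.add_left_comm] using this

lemma dlExtL_inv (a b : List Char) (alo blo : Nat) :
    ∀ (bi bj bk : Nat), alo ≤ bi → blo ≤ bj →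
      (let e := dlExtL a b alo blo bi bj bk
       alo ≤ e.1 ∧ blo ≤ e.2.1 ∧ e.1 + e.2.2 = bi + bk ∧ e.2.1 + e.2.2 = bj + bk) := by
  intro bi
  induction bi using Nat.strong_induction_on with
  | _ bi ih =>
    intro bj bk h1 h2
    rw [dlExtL]
    split_ifs with h
    · have := ih (bi - 1) (by omega) (bj - 1) (bk + 1) (by omega) (by omega)
      refine ⟨this.1, this.2.1, ?_, ?_⟩ <;> omega
    · exact ⟨h1, h2, rfl, rfl⟩

lemma dlExtR_inv (a b : List Char) (ahi bhi : Nat) :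
    ∀ (fk bi bj bk : Nat), fk = ahi - (bi + bk) →
      (bi + bk ≤ ahi ∨ bk = 0) → (bj + bk ≤ bhi ∨ bk = 0) →
      (let k := dlExtR a b ahi bhi bi bj bk
       bk ≤ k ∧ (bi + k ≤ ahi ∨ k = 0) ∧ (bj + k ≤ bhi ∨ k = 0)) := by
  intro fk
  induction fk using Nat.strong_induction_on with
  | _ fk ih =>
    intro bi bj bk hfk h1 h2
    rw [dlExtR]
    split_ifs with h
    · have := ih (ahi - (bi + (bk + 1))) (by omega) bi bj (bk + 1) rfl
        (by omega) (by omega)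
      exact ⟨by omega, this.2.1, this.2.2⟩
    · exact ⟨le_refl _, h1, h2⟩

lemma dlFLM_inv (a b : List Char) (b2j : PySem.Dict Char (List Nat)) (alo ahi blo bhi : Nat)
    (h1 : alo ≤ ahi) (h2 : blo ≤ bhi) :
    (let x := dlFLM a b b2j alo ahi blo bhi
     alo ≤ x.1 ∧ blo ≤ x.2.1 ∧ x.1 + x.2.2 ≤ ahi ∧ x.2.1 + x.2.2 ≤ bhi) := by
  have hr := dlRows_inv a b2j alo blo bhi (ahi - alo) alo PySem.Dict.empty (alo, blo, 0)
    (le_refl _) (by intro jj; left; simp [PySem.Dict.getD_empty])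
    ⟨le_refl _, le_refl _, by simp, by simpa using h2⟩
  set r := dlRows a b2j blo bhi (List.range' alo (ahi - alo)) (PySem.Dict.empty, alo, blo, 0)
  have hrb : alo ≤ r.2.1 ∧ blo ≤ r.2.2.1 ∧ r.2.1 + r.2.2.2 ≤ ahi ∧ r.2.2.1 + r.2.2.2 ≤ bhi := by
    refine ⟨hr.1, hr.2.1, ?_, hr.2.2.2⟩
    have := hr.2.2.1; omega
  have he := dlExtL_inv a b alo blo r.2.1 r.2.2.1 r.2.2.2 hrb.1 hrb.2.1
  set e := dlExtL a b alo blo r.2.1 r.2.2.1 r.2.2.2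
  have hk := dlExtR_inv a b ahi bhi (ahi - (e.1 + e.2.2)) e.1 e.2.1 e.2.2 rfl
    (Or.inl (by omega)) (Or.inl (by omega))
  show alo ≤ e.1 ∧ blo ≤ e.2.1 ∧ e.1 + dlExtR a b ahi bhi e.1 e.2.1 e.2.2 ≤ ahi ∧
       e.2.1 + dlExtR a b ahi bhi e.1 e.2.1 e.2.2 ≤ bhi
  refine ⟨he.1, he.2.1, ?_, ?_⟩
  · rcases hk.2.1 with h | h
    · exact h
    · rw [h]; omega
  · rcases hk.2.2 with h | h
    · exact h
    · rw [h]; omega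
  
-- the emitted blocks of the queue loop: nonzero, inside [0, lb) on the b side, pairwise separated
lemma dlQueue_inv (a b : List Char) (b2j : PySem.Dict Char (List Nat)) (lb : Nat) :
    ∀ (fuel : Nat) (q : List (Nat × Nat × Nat × Nat)) (acc : List (Nat × Nat × Nat)),
      (∀ r ∈ q, dlWF lb r) →
      (∀ x ∈ acc, 0 < x.2.2 ∧ x.2.1 + x.2.2 ≤ lb) →
      (q ++ acc.map toReg).Pairwise dlSep →
      (∀ x ∈ dlQueue a b b2j fuel q acc, 0 < x.2.2 ∧ x.2.1 + x.2.2 ≤ lb) ∧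
      ((dlQueue a b b2j fuel q acc).map toReg).Pairwise dlSep := by
  intro fuel
  induction fuel with
  | zero =>
    intro q acc hq hacc hp
    rw [dlQueue]
    refine ⟨hacc, ?_⟩
    exact ((List.pairwise_append.mp hp).2.1)
  | succ fuel ih =>
    intro q acc hq hacc hp
    match q with
    | [] =>
      rw [dlQueue]
      exact ⟨hacc, by simpa using hp⟩
    | (alo, ahi, blo, bhi) :: qt =>
      rw [dlQueue]
      have hwf : dlWF lb (alo, ahi, blo, bhi) := hq _ (List.mem_cons_self ..)
      have hflm := dlFLM_inv a b b2j alo ahi blo bhi hwf.1 hwf.2.1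
      set x := dlFLM a b b2j alo ahi blo bhi with hxdef
      obtain ⟨i, j, k⟩ := x
      simp only at hflm
      obtain ⟨hi1, hj1, hi2, hj2⟩ := hflm
      have hwf' : alo ≤ ahi ∧ blo ≤ bhi ∧ bhi ≤ lb := hwf
      have hpc : ((alo, ahi, blo, bhi) :: (qt ++ acc.map toReg)).Pairwise dlSep := hp
      have hrest : (qt ++ acc.map toReg).Pairwise dlSep := (List.pairwise_cons.mp hpc).2
      have hrsep : ∀ s ∈ qt ++ acc.map toReg, dlSep (alo, ahi, blo, bhi) s :=
        (List.pairwise_cons.mp hpc).1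
      by_cases hk : k ≠ 0
      · simp only [if_pos hk]
        set q1 := if alo < i ∧ blo < j then [(alo, i, blo, j)] else [] with hq1def
        set q2 := if i + k < ahi ∧ j + k < bhi then [(i + k, ahi, j + k, bhi)] else [] with hq2def
        -- containment of the three new regions in the popped one
        have hcont : ∀ s ∈ q2 ++ q1 ++ [toReg (i, j, k)], dlCont s (alo, ahi, blo, bhi) := by
          intro s hs
          simp only [List.mem_append, List.mem_singleton] at hs
          rcases hs with (hs | hs) | hs
          · rw [hq2def] at hs
            split_ifs at hs with hg
            · simp at hs; subst hs
              show alo ≤ i + k ∧ ahi ≤ ahi ∧ blo ≤ j + k ∧ bhi ≤ bhi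
              omega
            · simp at hs
          · rw [hq1def] at hs
            split_ifs at hs with hg
            · simp at hs; subst hs
              show alo ≤ alo ∧ i ≤ ahi ∧ blo ≤ blo ∧ j ≤ bhi
              omega
            · simp at hs
          · subst hs
            show alo ≤ i ∧ i + k ≤ ahi ∧ blo ≤ j ∧ j + k ≤ bhi
            exact ⟨hi1, hi2, hj1, hj2⟩
        have hwfnew : ∀ r ∈ q2 ++ q1, dlWF lb r := by
          intro r hr
          simp only [List.mem_append] at hr
          rcases hr with hr | hr
          · rw [hq2def] at hr; split_ifs at hr with hg
            · simp at hr; subst hr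
              show i + k ≤ ahi ∧ j + k ≤ bhi ∧ bhi ≤ lb
              exact ⟨by omega, by omega, hwf'.2.2⟩
            · simp at hr
          · rw [hq1def] at hr; split_ifs at hr with hg
            · simp at hr; subst hr
              show alo ≤ i ∧ blo ≤ j ∧ j ≤ lb
              have := hwf'.2.2
              omega
            · simp at hr
        -- pairwise among the three new regions (each earlier one left of the later)
        have hpnew : (q2 ++ q1 ++ [toReg (i, j, k)]).Pairwise dlSep := by
          rw [hq1def, hq2def]
          split_ifs <;>
            simp [List.pairwise_cons, toReg, dlSep]
        have hkey : ((q2 ++ q1 ++ qt) ++ (acc.map toReg ++ [toReg (i, j, k)])).Pairwise dlSep := by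
          have hperm : ((q2 ++ q1 ++ qt) ++ (acc.map toReg ++ [toReg (i, j, k)])).Perm
              ((q2 ++ q1 ++ [toReg (i, j, k)]) ++ (qt ++ acc.map toReg)) := by
            have : ((q2 ++ q1 ++ qt) ++ (acc.map toReg ++ [toReg (i, j, k)])) =
                ((q2 ++ q1) ++ ((qt ++ acc.map toReg) ++ [toReg (i, j, k)])) := by
              simp [List.append_assoc]
            rw [this]
            have : ((q2 ++ q1 ++ [toReg (i, j, k)]) ++ (qt ++ acc.map toReg)) =
                ((q2 ++ q1) ++ ([toReg (i, j, k)] ++ (qt ++ acc.map toReg))) := by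
              simp [List.append_assoc]
            rw [this]
            exact List.Perm.append_left _ (List.perm_append_comm)
          refine (List.Perm.pairwise_iff (fun h => dlSep_symm h) hperm).mpr ?_
          rw [List.pairwise_append]
          refine ⟨hpnew, hrest, ?_⟩
          intro u hu v hv
          exact dlSep_mono (hcont u hu) (hrsep v hv)
        have haccnew : ∀ y ∈ acc ++ [(i, j, k)], 0 < y.2.2 ∧ y.2.1 + y.2.2 ≤ lb := by
          intro y hy
          rcases List.mem_append.mp hy with hy | hy
          · exact hacc y hy
          · simp at hy; subst hy
            show 0 < k ∧ j + k ≤ lb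
            have := hwf'.2.2
            exact ⟨Nat.pos_of_ne_zero hk, by omega⟩
        apply ih (q2 ++ q1 ++ qt) (acc ++ [(i, j, k)])
        · intro r hr
          rcases List.mem_append.mp hr with hr | hr
          · exact hwfnew r hr
          · exact hq r (List.mem_cons_of_mem _ hr)
        · exact haccnew
        · simpa [List.append_assoc] using hkey
      · simp only [if_neg hk]
        exact ih qt acc (fun r hr => hq r (List.mem_cons_of_mem _ hr)) hacc hrest

-- ¬ lt, Python's ≤ on the sorted triples
def dlLexLe (p q : Nat × Nat × Nat) : Prop := ¬ dlLexLt q p = true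

lemma dlLexLe_iff (p q : Nat × Nat × Nat) :
    dlLexLe p q ↔ (p.1 < q.1 ∨ (p.1 = q.1 ∧ (p.2.1 < q.2.1 ∨ (p.2.1 = q.2.1 ∧ p.2.2 ≤ q.2.2)))) := by
  obtain ⟨a1, a2, a3⟩ := p; obtain ⟨b1, b2, b3⟩ := q
  simp [dlLexLe, dlLexLt, decide_eq_true_eq]
  omega

lemma dlLexLe_trans {p q r : Nat × Nat × Nat} (h1 : dlLexLe p q) (h2 : dlLexLe q r) : dlLexLe p r := by
  rw [dlLexLe_iff] at *
  omega

lemma insertBy_perm (x : Nat × Nat × Nat) (ys : List (Nat × Nat × Nat)) :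
    (PySem.List.insertBy dlLexLt x ys).Perm (x :: ys) := by
  induction ys with
  | nil => simp [PySem.List.insertBy]
  | cons y ys ih =>
    rw [PySem.List.insertBy]
    split_ifs with h
    · exact List.Perm.refl _
    · exact List.Perm.trans (List.Perm.cons y ih) (List.Perm.swap x y ys)

lemma insertBy_pairwise (x : Nat × Nat × Nat) (ys : List (Nat × Nat × Nat))
    (h : ys.Pairwise dlLexLe) :
    (PySem.List.insertBy dlLexLt x ys).Pairwise dlLexLe := by
  induction ys with
  | nil => simp [PySem.List.insertBy]
  | cons y ys ih =>
    obtain ⟨hy, hys⟩ := List.pairwise_cons.mp h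
    rw [PySem.List.insertBy]
    split_ifs with hlt
    · -- x goes first: x ≤ y and by transitivity x ≤ everything in ys
      have hxy : dlLexLe x y := by
        obtain ⟨a1, a2, a3⟩ := x; obtain ⟨b1, b2, b3⟩ := y
        simp only [dlLexLt, decide_eq_true_eq] at hlt
        rw [dlLexLe_iff]
        simp only at *
        omega
      refine List.pairwise_cons.mpr ⟨?_, h⟩
      intro z hz
      rcases List.mem_cons.mp hz with hz | hz
      · subst hz; exact hxy
      · exact dlLexLe_trans hxy (hy z hz)
    · refine List.pairwise_cons.mpr ⟨?_, ih hys⟩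
      intro z hz
      rcases (PySem.List.mem_insertBy ..).mp hz with hz | hz
      · subst hz
        simpa [dlLexLe] using hlt
      · exact hy z hz

lemma dlSort_perm (xs : List (Nat × Nat × Nat)) : (dlSort xs).Perm xs := by
  suffices h : ∀ (xs acc : List (Nat × Nat × Nat)),
      (xs.foldl (fun acc x => PySem.List.insertBy dlLexLt x acc) acc).Perm (xs ++ acc) by
    simpa using h xs []
  intro xs
  induction xs with
  | nil => intro acc; simp
  | cons x xs ih =>
    intro acc
    refine List.Perm.trans (ih _) ?_
    refine List.Perm.trans (List.Perm.append_left xs (insertBy_perm x acc)) ?_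
    exact List.perm_middle

lemma dlSort_pairwise (xs : List (Nat × Nat × Nat)) : (dlSort xs).Pairwise dlLexLe := by
  suffices h : ∀ (xs acc : List (Nat × Nat × Nat)), acc.Pairwise dlLexLe →
      (xs.foldl (fun acc x => PySem.List.insertBy dlLexLt x acc) acc).Pairwise dlLexLe by
    exact h xs [] (List.Pairwise.nil)
  intro xs
  induction xs with
  | nil => intro acc h; exact h
  | cons x xs ih => intro acc h; exact ih _ (insertBy_pairwise x acc h)

-- separated + lexicographically ordered blocks are chained in both coordinates
def dlBefore (x y : Nat × Nat × Nat) : Prop :=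
  x.1 + x.2.2 ≤ y.1 ∧ x.2.1 + x.2.2 ≤ y.2.1

lemma before_of_sep_le {x y : Nat × Nat × Nat}
    (hs : dlSep (toReg x) (toReg y)) (hl : dlLexLe x y) : dlBefore x y := by
  obtain ⟨a1, a2, a3⟩ := x; obtain ⟨b1, b2, b3⟩ := y
  rw [dlLexLe_iff] at hl
  simp only [toReg, dlSep, dlBefore] at *
  omega

-- chain of blocks in the b coordinate: gaps never go backwards, all ends within lb
def dlGood (lb : Nat) : Nat → List (Nat × Nat × Nat) → Prop
  | e, [] => e ≤ lb
  | e, (_, bj, n) :: rest => e ≤ bj ∧ bj + n ≤ lb ∧ dlGood lb (bj + n) rest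

-- as dlGood, but the chain ends exactly at lb (the terminating sentinel block)
def dlGoodF (lb : Nat) : Nat → List (Nat × Nat × Nat) → Prop
  | e, [] => e = lb
  | e, (_, bj, n) :: rest => e ≤ bj ∧ bj + n ≤ lb ∧ dlGoodF lb (bj + n) rest

lemma dlGood_sentinel (lb la : Nat) :
    ∀ (xs : List (Nat × Nat × Nat)) (e : Nat), dlGood lb e xs →
      dlGoodF lb e (xs ++ [(la, lb, 0)]) := by
  intro xs
  induction xs with
  | nil => intro e h; exact ⟨h, by omega, rfl⟩
  | cons x xs ih =>
    intro e h
    obtain ⟨ai, bj, n⟩ := x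
    exact ⟨h.1, h.2.1, ih _ h.2.2⟩

lemma dlMerge_good (lb : Nat) :
    ∀ (xs : List (Nat × Nat × Nat)) (i1 j1 k1 e : Nat),
      xs.Pairwise dlBefore →
      (∀ x ∈ xs, x.2.1 + x.2.2 ≤ lb) →
      (∀ x ∈ xs, i1 + k1 ≤ x.1 ∧ j1 + k1 ≤ x.2.1) →
      e ≤ j1 → j1 + k1 ≤ lb →
      dlGood lb e (dlMerge xs i1 j1 k1) := by
  intro xs
  induction xs with
  | nil =>
    intro i1 j1 k1 e _ _ _ he hlb
    rw [dlMerge]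
    split_ifs
    · exact ⟨he, hlb, hlb⟩
    · show e ≤ lb
      omega
  | cons x xs ih =>
    intro i1 j1 k1 e hpw hxlb hafter he hlb
    obtain ⟨i2, j2, k2⟩ := x
    obtain ⟨hbx, hpw'⟩ := List.pairwise_cons.mp hpw
    have hx : i1 + k1 ≤ i2 ∧ j1 + k1 ≤ j2 := hafter _ (List.mem_cons_self ..)
    have hxl : j2 + k2 ≤ lb := hxlb _ (List.mem_cons_self ..)
    rw [dlMerge]
    split_ifs with hm hk1
    · -- adjacent: merge into (i1, j1, k1 + k2)
      apply ih i1 j1 (k1 + k2) e hpw' (fun x hx => hxlb x (List.mem_cons_of_mem _ hx))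
      · intro y hy
        have h3 : i2 + k2 ≤ y.1 ∧ j2 + k2 ≤ y.2.1 := hbx y hy
        obtain ⟨hm1, hm2⟩ := hm
        exact ⟨by omega, by omega⟩
      · exact he
      · obtain ⟨hm1, hm2⟩ := hm
        omega
    · -- emit (i1, j1, k1), continue from (i2, j2, k2)
      refine ⟨he, hlb, ?_⟩
      apply ih i2 j2 k2 (j1 + k1) hpw' (fun x hx => hxlb x (List.mem_cons_of_mem _ hx))
        (fun y hy => by
          have h3 : i2 + k2 ≤ y.1 ∧ j2 + k2 ≤ y.2.1 := hbx y hy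
          exact h3) hx.2 hxl
    · -- k1 = 0: emit nothing
      show dlGood lb e ([] ++ dlMerge xs i2 j2 k2)
      rw [List.nil_append]
      apply ih i2 j2 k2 e hpw' (fun x hx => hxlb x (List.mem_cons_of_mem _ hx))
        (fun y hy => by
          have h3 : i2 + k2 ≤ y.1 ∧ j2 + k2 ≤ y.2.1 := hbx y hy
          exact h3) (by omega) hxl

-- the chain property of get_matching_blocks' output
lemma matchingBlocks_good (a b : List Char) :
    dlGoodF b.length 0 (dlMatchingBlocks a b) := by
  have hq := dlQueue_inv a b (dlB2j b) b.length (2 * a.length + 2)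
    [(0, a.length, 0, b.length)] []
    (by intro r hr; simp at hr; subst hr; exact ⟨Nat.zero_le _, Nat.zero_le _, le_refl _⟩)
    (by intro x hx; simp at hx)
    (by simp)
  set mb := dlQueue a b (dlB2j b) (2 * a.length + 2) [(0, a.length, 0, b.length)] [] with hmb
  have hperm := dlSort_perm mb
  have hle := dlSort_pairwise mb
  have hsep : ((dlSort mb).map toReg).Pairwise dlSep := by
    refine (List.Perm.pairwise_iff (fun h => dlSep_symm h) (hperm.map toReg)).mpr hq.2
  have hbefore : (dlSort mb).Pairwise dlBefore := by
    have h1 : (dlSort mb).Pairwise (fun x y => dlSep (toReg x) (toReg y)) :=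
      List.pairwise_map.mp hsep
    exact (h1.and hle).imp (fun h => before_of_sep_le h.1 h.2)
  have hmem : ∀ x ∈ dlSort mb, x.2.1 + x.2.2 ≤ b.length := by
    intro x hx
    exact (hq.1 x (hperm.mem_iff.mp hx)).2
  have hgood := dlMerge_good b.length (dlSort mb) 0 0 0 0 hbefore hmem
    (by intro x hx; exact ⟨Nat.zero_le _, Nat.zero_le _⟩) (le_refl _) (Nat.zero_le _)
  exact dlGood_sentinel b.length a.length _ 0 hgood

-- ===== relating the two folds =====

-- mathematical sum of the block sizes
def dlS (bs : List (Nat × Nat × Nat)) : Nat := (bs.map (fun x => x.2.2)).sum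

lemma sumSizes_eq (bs : List (Nat × Nat × Nat)) : sumSizes bs = dlS bs := by
  suffices h : ∀ (bs : List (Nat × Nat × Nat)) (c : Nat),
      bs.foldl (fun s x => s + x.2.2) c = c + dlS bs by
    simpa using h bs 0
  intro bs
  induction bs with
  | nil => intro c; simp [dlS]
  | cons x bs ih => intro c; simp [dlS, ih, List.sum_cons]; omega

lemma slice_len (new : List Char) (e j : Nat) (_he : e ≤ j) (hj : j ≤ new.length) :
    (PySem.List.slice new (some (e : Int)) (some (j : Int))).length = j - e := by
  rw [PySem.List.slice_natCast]
  simp [List.length_drop, List.length_take]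
  omega

-- the heart of the equivalence: A's fold over the opcodes of a chained block list
-- equals B's closed form (added) and B's first-gap scan (snippet)
lemma foldA_eq (new : List Char) :
    ∀ (bs : List (Nat × Nat × Nat)) (i e : Nat) (added : Int) (snip : List Char),
      dlGoodF new.length e bs →
      (dlOpcodes bs i e).foldl (stepA new) (added, snip)
        = (added + ((new.length : Int) - e - dlS bs),
           if snip = [] then firstGap new bs e else snip) := by
  intro bs
  induction bs with
  | nil =>
    intro i e added snip hg
    have hlen : e = new.length := hg
    subst hlen
    simp [dlOpcodes, dlS, firstGap]
  | cons blk rest ih =>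
    intro i e added snip hg
    obtain ⟨ai, bj, n⟩ := blk
    obtain ⟨h1, h2, h3⟩ := hg
    rw [dlOpcodes]
    have hdlS : dlS ((ai, bj, n) :: rest) = n + dlS rest := by simp [dlS]
    have hB : ∀ st : Int × List Char,
        (if n ≠ 0 then [("equal", ai, ai + n, bj, bj + n)] else []).foldl (stepA new) st = st := by
      intro st
      split_ifs
      · simp [stepA]
      · simp
    by_cases hlt : e < bj
    · -- an insert or replace opcode with chunk new[e:bj], nonempty
      have htag : (if i < ai ∧ e < bj then "replace"
          else if i < ai then "delete" else if e < bj then "insert" else "") = "replace" ∨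
          (if i < ai ∧ e < bj then "replace"
          else if i < ai then "delete" else if e < bj then "insert" else "") = "insert" := by
        by_cases hi : i < ai <;> simp [hi, hlt]
      set tag := (if i < ai ∧ e < bj then "replace"
          else if i < ai then "delete" else if e < bj then "insert" else "") with htagdef
      have htagne : tag ≠ "" := by rcases htag with h | h <;> simp [h]
      set chunk := PySem.List.slice new (some (e : Int)) (some (bj : Int)) with hchunk
      have hclen : chunk.length = bj - e := slice_len new e bj (by omega) (by omega)
      have hcne : chunk ≠ [] := by
        intro hnil
        rw [hnil] at hclen
        simp at hclen
        omega
      have hcond : tag = "insert" ∨ tag = "replace" := htag.symm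
      have hstep : stepA new (added, snip) (tag, i, ai, e, bj)
          = (added + ((bj : Int) - e), if snip = [] then chunk else snip) := by
        simp only [stepA]
        rw [if_pos hcond, ← hchunk, hclen, Nat.cast_sub (le_of_lt hlt)]
      rw [if_pos htagne]
      simp only [List.cons_append, List.nil_append, List.foldl_append, List.foldl_cons]
      rw [hstep, hB]
      rw [ih (ai + n) (bj + n) _ _ h3]
      have hsnip' : (if snip = [] then chunk else snip) ≠ [] := by
        split_ifs <;> assumption
      rw [if_neg hsnip']
      rw [Prod.mk.injEq]
      refine ⟨?_, ?_⟩
      · rw [hdlS]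
        have hble : (bj : Int) + n ≤ new.length := by exact_mod_cast h2
        push_cast
        omega
      · show (if snip = [] then chunk else snip)
            = if snip = [] then firstGap new ((ai, bj, n) :: rest) e else snip
        rw [firstGap, if_pos hlt, hchunk]
    · -- no inserted text before this block (e = bj); delete/empty opcodes are skipped
      have hebj : e = bj := by omega
      have htag : (if i < ai ∧ e < bj then "replace"
          else if i < ai then "delete" else if e < bj then "insert" else "") = "delete" ∨
          (if i < ai ∧ e < bj then "replace"
          else if i < ai then "delete" else if e < bj then "insert" else "") = "" := by
        by_cases hi : i < ai <;> simp [hi, hlt]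
      set tag := (if i < ai ∧ e < bj then "replace"
          else if i < ai then "delete" else if e < bj then "insert" else "") with htagdef
      have hA : (if tag ≠ "" then [(tag, i, ai, e, bj)] else []).foldl (stepA new) (added, snip)
          = (added, snip) := by
        rcases htag with h | h <;> simp [h, stepA]
      rw [List.foldl_append, List.foldl_append, hA, hB]
      rw [ih (ai + n) (bj + n) added snip h3]
      subst hebj
      rw [Prod.mk.injEq]
      refine ⟨?_, ?_⟩
      · rw [hdlS]
        push_cast
        omega
      · show (if snip = [] then firstGap new rest (e + n) else snip)
            = if snip = [] then firstGap new ((ai, e, n) :: rest) e else snip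
        rw [firstGap, if_neg (lt_irrefl e)]

-- ===== the leftmost-longest-match specification =====

-- length of the common run starting at (i, j), clipped to i < ahi, j < bhi
def bFr (a b : List Char) (ahi bhi : Nat) (i j : Nat) : Nat :=
  if i < ahi ∧ j < bhi ∧ a.getD i ' ' = b.getD j ' ' then bFr a b ahi bhi (i + 1) (j + 1) + 1
  else 0
termination_by ahi - i
decreasing_by omega

lemma bFr_le_a (a b : List Char) (ahi bhi : Nat) :
    ∀ (fk i j : Nat), fk = ahi - i → bFr a b ahi bhi i j ≤ ahi - i := by
  intro fk
  induction fk using Nat.strong_induction_on with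
  | _ fk ih =>
    intro i j hfk
    rw [bFr]
    split_ifs with h
    · have := ih (ahi - (i + 1)) (by omega) (i + 1) (j + 1) rfl
      omega
    · omega

lemma bFr_le_b (a b : List Char) (ahi bhi : Nat) :
    ∀ (fk i j : Nat), fk = ahi - i → bFr a b ahi bhi i j ≤ bhi - j := by
  intro fk
  induction fk using Nat.strong_induction_on with
  | _ fk ih =>
    intro i j hfk
    rw [bFr]
    split_ifs with h
    · have := ih (ahi - (i + 1)) (by omega) (i + 1) (j + 1) rfl
      omega
    · omega

lemma bFr_pos (a b : List Char) (ahi bhi i j : Nat) (h : bFr a b ahi bhi i j ≠ 0) :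
    i < ahi ∧ j < bhi ∧ a.getD i ' ' = b.getD j ' ' := by
  by_contra hc
  rw [bFr, if_neg hc] at h
  exact h rfl

-- the chars along the run are equal
lemma bFr_run (a b : List Char) (ahi bhi : Nat) :
    ∀ (fk i j : Nat), fk = ahi - i →
      ∀ t, t < bFr a b ahi bhi i j → a.getD (i + t) ' ' = b.getD (j + t) ' ' := by
  intro fk
  induction fk using Nat.strong_induction_on with
  | _ fk ih =>
    intro i j hfk t ht
    rw [bFr] at ht
    split_ifs at ht with h
    · match t with
      | 0 => exact h.2.2
      | t + 1 =>
        have := ih (ahi - (i + 1)) (by omega) (i + 1) (j + 1) rfl t (by omega)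
        simpa [Nat.add_assoc, Nat.add_comm 1 t, Nat.add_left_comm] using this
    · omega

-- any equal run within the clip bounds is counted
lemma bFr_max (a b : List Char) (ahi bhi : Nat) :
    ∀ (m i j : Nat), (∀ t, t < m → a.getD (i + t) ' ' = b.getD (j + t) ' ') →
      i + m ≤ ahi → j + m ≤ bhi → m ≤ bFr a b ahi bhi i j := by
  intro m
  induction m with
  | zero => intro i j _ _ _; exact Nat.zero_le _
  | succ m ih =>
    intro i j hrun ha hb
    rw [bFr]
    have h0 := hrun 0 (by omega)
    rw [if_pos ⟨by omega, by omega, by simpa using h0⟩]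
    have := ih (i + 1) (j + 1)
      (fun t ht => by
        have := hrun (t + 1) (by omega)
        simpa [Nat.add_assoc, Nat.add_comm 1 t, Nat.add_left_comm] using this)
      (by omega) (by omega)
    omega

-- the run stops at the first mismatch within bounds
lemma bFr_stop (a b : List Char) (ahi bhi : Nat) :
    ∀ (m i j : Nat), bFr a b ahi bhi i j = m → i + m < ahi → j + m < bhi →
      ¬ a.getD (i + m) ' ' = b.getD (j + m) ' ' := by
  intro m
  induction m with
  | zero =>
    intro i j h ha hb hc
    rw [bFr, if_pos ⟨by omega, by omega, by simpa using hc⟩] at h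
    omega
  | succ m ih =>
    intro i j h ha hb hc
    rw [bFr] at h
    split_ifs at h with h1
    have := ih (i + 1) (j + 1) (by omega) (by omega) (by omega)
    exact this (by simpa [Nat.add_assoc, Nat.add_comm 1 m, Nat.add_left_comm] using hc)

-- B's while loop computes bFr
lemma bRun_eq_fr (a b : List Char) (ahi bhi i j : Nat) :
    ∀ (fk k : Nat), fk = ahi - (i + k) →
      bRun a b ahi bhi i j k = k + bFr a b ahi bhi (i + k) (j + k) := by
  intro fk
  induction fk using Nat.strong_induction_on with
  | _ fk ih =>
    intro k hfk
    rw [bRun, bFr]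
    split_ifs with h
    · have := ih (ahi - (i + (k + 1))) (by omega) (k + 1) rfl
      rw [this]
      have e1 : i + (k + 1) = i + k + 1 := by omega
      have e2 : j + (k + 1) = j + k + 1 := by omega
      rw [e1, e2]
      omega
    · omega

lemma bFr_eq_bRun (a b : List Char) (ahi bhi i j : Nat)
    (hi : i < ahi) (hj : j < bhi) (hok : a.getD i ' ' = b.getD j ' ') :
    bFr a b ahi bhi i j = bRun a b ahi bhi i j 1 := by
  rw [bRun_eq_fr a b ahi bhi i j (ahi - (i + 1)) 1 rfl]
  rw [bFr, if_pos ⟨hi, hj, hok⟩]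
  omega

-- strict lexicographic order on start positions
def bLex (p q : Nat × Nat) : Prop := p.1 < q.1 ∨ (p.1 = q.1 ∧ p.2 < q.2)

-- (maximal k, then minimal i, then minimal j): the block find_longest_match returns
def bIsBest (a b : List Char) (alo ahi blo bhi : Nat) (t : Nat × Nat × Nat) : Prop :=
  (∀ i j, alo ≤ i → blo ≤ j → bFr a b ahi bhi i j ≤ t.2.2) ∧
  (t.2.2 = 0 → t = (alo, blo, 0)) ∧
  (t.2.2 ≠ 0 → alo ≤ t.1 ∧ blo ≤ t.2.1 ∧ bFr a b ahi bhi t.1 t.2.1 = t.2.2 ∧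
    ∀ i j, alo ≤ i → blo ≤ j → bLex (i, j) (t.1, t.2.1) → bFr a b ahi bhi i j < t.2.2)

lemma bIsBest_unique (a b : List Char) (alo ahi blo bhi : Nat) (t t' : Nat × Nat × Nat)
    (h : bIsBest a b alo ahi blo bhi t) (h' : bIsBest a b alo ahi blo bhi t') : t = t' := by
  obtain ⟨hm, hz, hw⟩ := h
  obtain ⟨hm', hz', hw'⟩ := h'
  by_cases hk : t.2.2 = 0
  · by_cases hk' : t'.2.2 = 0
    · rw [hz hk, hz' hk']
    · obtain ⟨h1, h2, h3, _⟩ := hw' hk'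
      have := hm t'.1 t'.2.1 h1 h2
      omega
  · by_cases hk' : t'.2.2 = 0
    · obtain ⟨h1, h2, h3, _⟩ := hw hk
      have := hm' t.1 t.2.1 h1 h2
      omega
    · obtain ⟨h1, h2, h3, h4⟩ := hw hk
      obtain ⟨h1', h2', h3', h4'⟩ := hw' hk'
      have hkk : t.2.2 = t'.2.2 := by
        have u1 := hm t'.1 t'.2.1 h1' h2'
        have u2 := hm' t.1 t.2.1 h1 h2
        omega
      have hpos : (t.1, t.2.1) = (t'.1, t'.2.1) := by
        by_contra hne
        have : bLex (t.1, t.2.1) (t'.1, t'.2.1) ∨ bLex (t'.1, t'.2.1) (t.1, t.2.1) := by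
          simp only [bLex]
          by_cases e1 : t.1 = t'.1
          · have e2 : t.2.1 ≠ t'.2.1 := by
              intro e2
              exact hne (by rw [Prod.mk.injEq]; exact ⟨e1, e2⟩)
            omega
          · omega
        rcases this with hl | hl
        · have := h4' t.1 t.2.1 h1 h2 hl
          omega
        · have := h4 t'.1 t'.2.1 h1' h2' hl
          omega
      obtain ⟨g1, g2⟩ := Prod.mk.inj hpos
      exact Prod.ext g1 (Prod.ext g2 hkk)

-- invariant of the scan: t is the best over starts lexicographically before (i0, j0)
def bPartial (a b : List Char) (alo ahi blo bhi i0 j0 : Nat) (t : Nat × Nat × Nat) : Prop :=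
  (∀ i j, alo ≤ i → blo ≤ j → bLex (i, j) (i0, j0) → bFr a b ahi bhi i j ≤ t.2.2) ∧
  (t.2.2 = 0 → t = (alo, blo, 0)) ∧
  (t.2.2 ≠ 0 → alo ≤ t.1 ∧ blo ≤ t.2.1 ∧ bLex (t.1, t.2.1) (i0, j0) ∧
    bFr a b ahi bhi t.1 t.2.1 = t.2.2 ∧
    ∀ i j, alo ≤ i → blo ≤ j → bLex (i, j) (t.1, t.2.1) → bFr a b ahi bhi i j < t.2.2)

lemma bInner_spec (a b : List Char) (alo ahi blo bhi i0 : Nat)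
    (halo : alo ≤ i0) (hia : i0 < ahi) :
    ∀ (n j0 : Nat) (st : Nat × Nat × Nat), blo ≤ j0 →
      (j0 + n = bhi ∨ (bhi ≤ j0 ∧ n = 0)) →
      bPartial a b alo ahi blo bhi i0 j0 st →
      bPartial a b alo ahi blo bhi i0 bhi (bInner a b ahi bhi i0 (List.range' j0 n) st) := by
  intro n
  induction n with
  | zero =>
    intro j0 st hj0 hn hp
    rcases hn with hn | hn
    · have hje : j0 = bhi := by omega
      subst hje
      simpa [List.range', bInner] using hp
    obtain ⟨h1, h2, h3⟩ := hp
    simp only [List.range', bInner]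
    refine ⟨?_, h2, ?_⟩
    · intro i j hi hj hl
      apply h1 i j hi hj
      simp only [bLex] at hl ⊢
      omega
    · intro hk
      obtain ⟨g1, g2, g3, g4, g5⟩ := h3 hk
      refine ⟨g1, g2, ?_, g4, g5⟩
      have := (bFr_pos a b ahi bhi st.1 st.2.1 (by omega)).2.1
      simp only [bLex] at g3 ⊢
      omega
  | succ n ih =>
    intro j0 st hj0 hn hp
    have hj0b : j0 < bhi := by omega
    have hrw : List.range' j0 (n + 1) = j0 :: List.range' (j0 + 1) n := by
      simp [List.range'_succ]
    rw [hrw, bInner]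
    obtain ⟨bi, bj, bk⟩ := st
    obtain ⟨h1, h2, h3⟩ := hp
    dsimp only
    split_ifs with g1 g2 g3
    · -- break: nothing to the right of j0 in this row can beat bk
      refine ⟨?_, h2, ?_⟩
      · intro i j hi hj hl
        simp only [bLex] at hl
        rcases hl with hl | ⟨hl, hl2⟩
        · exact h1 i j hi hj (Or.inl hl)
        · by_cases hjj : j < j0
          · exact h1 i j hi hj (by simp only [bLex]; omega)
          · have := bFr_le_b a b ahi bhi (ahi - i) i j rfl
            simp only at *
            omega
      · intro hk
        obtain ⟨u1, u2, u3, u4, u5⟩ := h3 hk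
        refine ⟨u1, u2, ?_, u4, u5⟩
        simp only [bLex] at u3 ⊢
        omega
    · -- mismatch: bFr i0 j0 = 0
      have hfr0 : bFr a b ahi bhi i0 j0 = 0 := by
        rw [bFr, if_neg]
        intro hc
        exact g2 hc.2.2
      apply ih (j0 + 1) (bi, bj, bk) (by omega) (by omega)
      refine ⟨?_, h2, ?_⟩
      · intro i j hi hj hl
        simp only [bLex] at hl
        rcases hl with hl | ⟨hl, hl2⟩
        · exact h1 i j hi hj (Or.inl hl)
        · by_cases hjj : j < j0
          · exact h1 i j hi hj (by simp only [bLex]; omega)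
          · have hjeq : j = j0 := by omega
            subst hl hjeq
            simp only at *
            omega
      · intro hk
        obtain ⟨u1, u2, u3, u4, u5⟩ := h3 hk
        exact ⟨u1, u2, by simp only [bLex] at u3 ⊢; omega, u4, u5⟩
    · -- match and the run beats bk: new best (i0, j0, k)
      have hok : a.getD i0 ' ' = b.getD j0 ' ' := by
        by_contra hc
        exact g2 hc
      have hfr : bFr a b ahi bhi i0 j0 = bRun a b ahi bhi i0 j0 1 :=
        bFr_eq_bRun a b ahi bhi i0 j0 hia hj0b hok
      have hk1 : 1 ≤ bRun a b ahi bhi i0 j0 1 := by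
        rw [bRun_eq_fr a b ahi bhi i0 j0 (ahi - (i0 + 1)) 1 rfl]
        omega
      apply ih (j0 + 1) (i0, j0, bRun a b ahi bhi i0 j0 1) (by omega) (by omega)
      refine ⟨?_, ?_, ?_⟩
      · intro i j hi hj hl
        show bFr a b ahi bhi i j ≤ bRun a b ahi bhi i0 j0 1
        simp only [bLex] at hl
        rcases hl with hl | ⟨hl, hl2⟩
        · have := h1 i j hi hj (Or.inl hl)
          simp only at this
          omega
        · by_cases hjj : j < j0
          · have := h1 i j hi hj (by simp only [bLex]; omega)
            simp only at this
            omega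
          · have hjeq : j = j0 := by omega
            subst hl hjeq
            omega
      · intro hk
        exact absurd (show bRun a b ahi bhi i0 j0 1 = 0 from hk) (by omega)
      · intro _
        refine ⟨halo, hj0, ?_, ?_, ?_⟩
        · show bLex (i0, j0) (i0, j0 + 1)
          exact Or.inr ⟨rfl, Nat.lt_succ_self j0⟩
        · show bFr a b ahi bhi i0 j0 = bRun a b ahi bhi i0 j0 1
          exact hfr
        · intro i j hi hj hl
          show bFr a b ahi bhi i j < bRun a b ahi bhi i0 j0 1
          have hl' : bLex (i, j) (i0, j0) := hl
          have := h1 i j hi hj hl'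
          simp only at this
          omega
    · -- match but no improvement
      have hok : a.getD i0 ' ' = b.getD j0 ' ' := by
        by_contra hc
        exact g2 hc
      have hfr : bFr a b ahi bhi i0 j0 = bRun a b ahi bhi i0 j0 1 :=
        bFr_eq_bRun a b ahi bhi i0 j0 hia hj0b hok
      apply ih (j0 + 1) (bi, bj, bk) (by omega) (by omega)
      refine ⟨?_, h2, ?_⟩
      · intro i j hi hj hl
        simp only [bLex] at hl
        rcases hl with hl | ⟨hl, hl2⟩
        · exact h1 i j hi hj (Or.inl hl)
        · by_cases hjj : j < j0
          · exact h1 i j hi hj (by simp only [bLex]; omega)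
          · have hjeq : j = j0 := by omega
            subst hl hjeq
            simp only at *
            omega
      · intro hk
        obtain ⟨u1, u2, u3, u4, u5⟩ := h3 hk
        exact ⟨u1, u2, by simp only [bLex] at u3 ⊢; omega, u4, u5⟩

lemma bOuter_spec (a b : List Char) (alo ahi blo bhi : Nat) :
    ∀ (n i0 : Nat) (st : Nat × Nat × Nat), alo ≤ i0 →
      (i0 + n = ahi ∨ (ahi ≤ i0 ∧ n = 0)) →
      bPartial a b alo ahi blo bhi i0 blo st →
      bPartial a b alo ahi blo bhi ahi blo (bOuter a b ahi blo bhi (List.range' i0 n) st) := by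
  intro n
  induction n with
  | zero =>
    intro i0 st hi0 hn hp
    rcases hn with hn | hn
    · have hie : i0 = ahi := by omega
      subst hie
      simpa [List.range', bOuter] using hp
    obtain ⟨h1, h2, h3⟩ := hp
    simp only [List.range', bOuter]
    refine ⟨?_, h2, ?_⟩
    · intro i j hi hj hl
      apply h1 i j hi hj
      simp only [bLex] at hl ⊢
      omega
    · intro hk
      obtain ⟨g1, g2, g3, g4, g5⟩ := h3 hk
      refine ⟨g1, g2, ?_, g4, g5⟩
      have := (bFr_pos a b ahi bhi st.1 st.2.1 (by omega)).1
      simp only [bLex] at g3 ⊢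
      omega
  | succ n ih =>
    intro i0 st hi0 hn hp
    have hi0a : i0 < ahi := by omega
    have hrw : List.range' i0 (n + 1) = i0 :: List.range' (i0 + 1) n := by
      simp [List.range'_succ]
    rw [hrw, bOuter]
    obtain ⟨bi, bj, bk⟩ := st
    obtain ⟨h1, h2, h3⟩ := hp
    split_ifs with g1
    · -- break: no later row can beat bk
      refine ⟨?_, h2, ?_⟩
      · intro i j hi hj hl
        simp only [bLex] at hl
        rcases hl with hl | ⟨hl, hl2⟩
        · by_cases hii : i < i0
          · exact h1 i j hi hj (by simp only [bLex]; omega)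
          · have := bFr_le_a a b ahi bhi (ahi - i) i j rfl
            simp only at *
            omega
        · omega
      · intro hk
        obtain ⟨u1, u2, u3, u4, u5⟩ := h3 hk
        refine ⟨u1, u2, ?_, u4, u5⟩
        simp only [bLex] at u3 ⊢
        omega
    · -- process row i0, then induct
      apply ih (i0 + 1) _ (by omega) (by omega)
      have hrow := bInner_spec a b alo ahi blo bhi i0 hi0 hi0a (bhi - blo) blo (bi, bj, bk)
        (le_refl _) (by omega) ⟨h1, h2, h3⟩
      obtain ⟨r1, r2, r3⟩ := hrow
      refine ⟨?_, r2, ?_⟩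
      · intro i j hi hj hl
        simp only [bLex] at hl
        rcases hl with hl | ⟨hl, hl2⟩
        · by_cases hjb : j < bhi
          · exact r1 i j hi hj (by simp only [bLex]; omega)
          · have := bFr_le_b a b ahi bhi (ahi - i) i j rfl
            omega
        · omega
      · intro hk
        obtain ⟨u1, u2, u3, u4, u5⟩ := r3 hk
        refine ⟨u1, u2, ?_, u4, u5⟩
        simp only [bLex] at u3 ⊢
        omega

lemma bLongest_best (a b : List Char) (alo ahi blo bhi : Nat) :
    bIsBest a b alo ahi blo bhi (bLongest a b alo ahi blo bhi) := by
  rw [bLongest]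
  have h0 : bPartial a b alo ahi blo bhi alo blo (alo, blo, 0) := by
    refine ⟨?_, fun _ => rfl, fun hk => absurd rfl hk⟩
    intro i j hi hj hl
    simp only [bLex] at hl
    omega
  have hfin := bOuter_spec a b alo ahi blo bhi (ahi - alo) alo (alo, blo, 0)
    (le_refl _) (by omega) h0
  obtain ⟨h1, h2, h3⟩ := hfin
  refine ⟨?_, h2, ?_⟩
  · intro i j hi hj
    by_cases hia : i < ahi
    · exact h1 i j hi hj (by simp only [bLex]; omega)
    · have := bFr_le_a a b ahi bhi (ahi - i) i j rfl
      omega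
  · intro hk
    obtain ⟨u1, u2, _, u4, u5⟩ := h3 hk
    exact ⟨u1, u2, u4, u5⟩

-- ===== what the difflib DP computes: clipped backward run lengths =====

-- length of the common run ending at (i, j), clipped to start at or after (alo, blo)
def bRl (a b : List Char) (alo blo : Nat) (i j : Nat) : Nat :=
  if a.getD i ' ' = b.getD j ' ' then
    (if alo < i ∧ blo < j then bRl a b alo blo (i - 1) (j - 1) + 1 else 1)
  else 0
termination_by i
decreasing_by omega

lemma bRl_pos_of_ok (a b : List Char) (alo blo i j : Nat)
    (h : a.getD i ' ' = b.getD j ' ') : 1 ≤ bRl a b alo blo i j := by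
  rw [bRl, if_pos h]
  split_ifs <;> omega

lemma bRl_le (a b : List Char) (alo blo : Nat) :
    ∀ (i j : Nat), alo ≤ i → blo ≤ j →
      bRl a b alo blo i j ≤ i + 1 - alo ∧ bRl a b alo blo i j ≤ j + 1 - blo ∧
      bRl a b alo blo i j ≤ i + 1 ∧ bRl a b alo blo i j ≤ j + 1 := by
  intro i
  induction i using Nat.strong_induction_on with
  | _ i ih =>
    intro j hi hj
    rw [bRl]
    split_ifs with h1 h2
    · have := ih (i - 1) (by omega) (j - 1) (by omega) (by omega)
      refine ⟨by omega, by omega, by omega, by omega⟩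
    · omega
    · omega

lemma bRl_run (a b : List Char) (alo blo : Nat) :
    ∀ (i j : Nat), ∀ t, t < bRl a b alo blo i j →
      a.getD (i - t) ' ' = b.getD (j - t) ' ' := by
  intro i
  induction i using Nat.strong_induction_on with
  | _ i ih =>
    intro j t ht
    rw [bRl] at ht
    split_ifs at ht with h1 h2
    · match t with
      | 0 => simpa using h1
      | t + 1 =>
        have hrec := ih (i - 1) (by omega) (j - 1) t (by omega)
        have e1 : i - 1 - t = i - (t + 1) := by omega
        have e2 : j - 1 - t = j - (t + 1) := by omega
        rwa [e1, e2] at hrec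
    · have : t = 0 := by omega
      subst this
      simpa using h1
    · omega

lemma bRl_max (a b : List Char) (alo blo : Nat) :
    ∀ (m i j : Nat), (∀ t, t < m → a.getD (i - t) ' ' = b.getD (j - t) ' ') →
      m ≤ i + 1 - alo → m ≤ j + 1 - blo → m ≤ bRl a b alo blo i j := by
  intro m
  induction m with
  | zero => intro i j _ _ _; exact Nat.zero_le _
  | succ m ih =>
    intro i j hrun ha hb
    have h0 := hrun 0 (by omega)
    simp only [Nat.sub_zero] at h0
    rw [bRl, if_pos h0]
    split_ifs with h1
    · have := ih (i - 1) (j - 1)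
        (fun t ht => by
          have := hrun (t + 1) (by omega)
          have e1 : i - (t + 1) = i - 1 - t := by omega
          have e2 : j - (t + 1) = j - 1 - t := by omega
          rwa [e1, e2] at this)
        (by omega) (by omega)
      omega
    · omega

-- ===== bridges between forward and backward runs =====

lemma rl_to_fr (a b : List Char) (alo ahi blo bhi i j : Nat)
    (halo : alo ≤ i) (hblo : blo ≤ j) (hia : i < ahi) (hjb : j < bhi) :
    bRl a b alo blo i j ≤
      bFr a b ahi bhi (i + 1 - bRl a b alo blo i j) (j + 1 - bRl a b alo blo i j) := by
  set m := bRl a b alo blo i j with hm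
  have hle := bRl_le a b alo blo i j halo hblo
  apply bFr_max
  · intro t ht
    have := bRl_run a b alo blo i j (m - 1 - t) (by omega)
    have e1 : i - (m - 1 - t) = i + 1 - m + t := by omega
    have e2 : j - (m - 1 - t) = j + 1 - m + t := by omega
    rwa [e1, e2] at this
  · omega
  · omega

lemma fr_to_rl (a b : List Char) (alo ahi blo bhi i j : Nat)
    (hia : alo ≤ i) (hjb : blo ≤ j) (_hpos : bFr a b ahi bhi i j ≠ 0) :
    bFr a b ahi bhi i j ≤
      bRl a b alo blo (i + bFr a b ahi bhi i j - 1) (j + bFr a b ahi bhi i j - 1) := by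
  set m := bFr a b ahi bhi i j with hm
  apply bRl_max
  · intro t ht
    have := bFr_run a b ahi bhi (ahi - i) i j rfl (m - 1 - t) (by omega)
    have e1 : i + (m - 1 - t) = i + m - 1 - t := by omega
    have e2 : j + (m - 1 - t) = j + m - 1 - t := by omega
    rwa [e1, e2] at this
  · omega
  · omega

-- ===== the per-character index __chain_b builds =====

lemma b2j_getD (b : List Char) (c : Char) :
    (dlB2j b).getD c [] = (List.range b.length).filter (fun j => b.getD j ' ' == c) := by
  rw [dlB2j]
  suffices h : ∀ n,
      ((List.range n).foldl (fun d i => d.modify (b.getD i ' ') [] (· ++ [i]))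
        PySem.Dict.empty).getD c []
      = (List.range n).filter (fun j => b.getD j ' ' == c) by
    exact h b.length
  intro n
  induction n with
  | zero => simp [PySem.Dict.getD_empty]
  | succ n ih =>
    rw [List.range_succ, List.foldl_append, List.filter_append]
    simp only [List.foldl_cons, List.foldl_nil, List.filter_cons, List.filter_nil]
    by_cases hc : c = b.getD n ' '
    · subst hc
      rw [PySem.Dict.getD_modify_self, ih]
      simp
    · rw [PySem.Dict.getD_modify_of_ne _ _ _ hc, ih]
      have hfalse : (b.getD n ' ' == c) = false := by
        simp only [beq_eq_false_iff_ne]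
        exact fun h => hc h.symm
      rw [hfalse]
      simp

-- invariant of the DP row scan: t is the best over run ENDS lexicographically before (i0, j0)
def ePartial (a b : List Char) (alo ahi blo bhi i0 j0 : Nat) (t : Nat × Nat × Nat) : Prop :=
  (∀ i j, alo ≤ i → blo ≤ j → j < bhi → bLex (i, j) (i0, j0) → bRl a b alo blo i j ≤ t.2.2) ∧
  (t.2.2 = 0 → t = (alo, blo, 0)) ∧
  (t.2.2 ≠ 0 → ∃ ie je, alo ≤ ie ∧ ie < ahi ∧ blo ≤ je ∧ je < bhi ∧ bLex (ie, je) (i0, j0) ∧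
    bRl a b alo blo ie je = t.2.2 ∧ t = (ie + 1 - t.2.2, je + 1 - t.2.2, t.2.2) ∧
    ∀ i j, alo ≤ i → blo ≤ j → j < bhi → bLex (i, j) (ie, je) → bRl a b alo blo i j < t.2.2)

lemma ePartial_advance (a b : List Char) (alo ahi blo bhi i0 jb jb' : Nat) (t : Nat × Nat × Nat)
    (hjb : jb ≤ jb')
    (hz : ∀ j, jb ≤ j → j < jb' → j < bhi → bRl a b alo blo i0 j ≤ t.2.2)
    (hep : ePartial a b alo ahi blo bhi i0 jb t) :
    ePartial a b alo ahi blo bhi i0 jb' t := by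
  obtain ⟨h1, h2, h3⟩ := hep
  refine ⟨?_, h2, ?_⟩
  · intro i j hi hj hjb2 hl
    simp only [bLex] at hl
    rcases hl with hl | ⟨hl, hl2⟩
    · exact h1 i j hi hj hjb2 (Or.inl hl)
    · by_cases hjj : j < jb
      · exact h1 i j hi hj hjb2 (Or.inr ⟨hl, hjj⟩)
      · subst hl
        exact hz j (by omega) (by omega) hjb2
  · intro hk
    obtain ⟨ie, je, u1, u2, u3, u4, u5, u6, u7, u8⟩ := h3 hk
    exact ⟨ie, je, u1, u2, u3, u4, by simp only [bLex] at u5 ⊢; omega, u6, u7, u8⟩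

-- the row advances to the next row: end boundary (i0, bhi) = (i0 + 1, blo)
lemma ePartial_next_row (a b : List Char) (alo ahi blo bhi i0 : Nat) (t : Nat × Nat × Nat)
    (hep : ePartial a b alo ahi blo bhi i0 bhi t) :
    ePartial a b alo ahi blo bhi (i0 + 1) blo t := by
  obtain ⟨h1, h2, h3⟩ := hep
  refine ⟨?_, h2, ?_⟩
  · intro i j hi hj hjb2 hl
    apply h1 i j hi hj hjb2
    simp only [bLex] at hl ⊢
    omega
  · intro hk
    obtain ⟨ie, je, u1, u2, u3, u4, u5, u6, u7, u8⟩ := h3 hk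
    refine ⟨ie, je, u1, u2, u3, u4, ?_, u6, u7, u8⟩
    simp only [bLex] at u5 ⊢
    omega

-- what newj2len holds while row i0 is being scanned (keys below the boundary jb)
def dReprRow (a b : List Char) (alo blo bhi : Nat) (i0 jb : Nat) (D : PySem.Dict Int Nat) : Prop :=
  (∀ j : Nat, D.getD (j : Int) 0 =
    if blo ≤ j ∧ j < bhi ∧ j < jb then bRl a b alo blo i0 j else 0) ∧
  (∀ z : Int, z < 0 → D.getD z 0 = 0)

-- what j2len must say about the previous row for the 'j2len.get(j-1, 0) + 1' step to be right
def dHk (a b : List Char) (alo blo bhi i0 : Nat) (D : PySem.Dict Int Nat) : Prop :=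
  ∀ j : Nat, blo ≤ j → j < bhi → a.getD i0 ' ' = b.getD j ' ' →
    D.getD ((j : Int) - 1) 0 + 1 = bRl a b alo blo i0 j

lemma dHk_empty (a b : List Char) (alo blo bhi : Nat) :
    dHk a b alo blo bhi alo PySem.Dict.empty := by
  intro j h1 h2 hok
  rw [PySem.Dict.getD_empty, bRl, if_pos hok, if_neg (by omega)]

lemma dHk_step (a b : List Char) (alo blo bhi i0 : Nat) (halo : alo ≤ i0)
    (D : PySem.Dict Int Nat) (hr : dReprRow a b alo blo bhi i0 bhi D) :
    dHk a b alo blo bhi (i0 + 1) D := by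
  obtain ⟨hr1, hr2⟩ := hr
  intro j h1 h2 hok
  rw [bRl, if_pos hok, show i0 + 1 - 1 = i0 from rfl]
  by_cases hbl : blo < j
  · have hcast : ((j : Int) - 1) = ((j - 1 : Nat) : Int) := by omega
    rw [hcast, hr1 (j - 1), if_pos ⟨by omega, by omega, by omega⟩, if_pos ⟨by omega, hbl⟩]
  · have hje : j = blo := by omega
    rw [if_neg (by omega)]
    by_cases hb0 : j = 0
    · rw [hb0]
      rw [hr2 ((0 : Nat) - 1 : Int) (by omega)]
    · have hcast : ((j : Int) - 1) = ((j - 1 : Nat) : Int) := by omega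
      rw [hcast, hr1 (j - 1), if_neg (by omega)]

-- a t that is best before (i0, jb) with nothing eligible from jb on is best for the whole row
lemma ePartial_to_bhi (a b : List Char) (alo ahi blo bhi i0 jb : Nat) (t : Nat × Nat × Nat)
    (hz : ∀ j, jb ≤ j → j < bhi → bRl a b alo blo i0 j ≤ t.2.2)
    (hep : ePartial a b alo ahi blo bhi i0 jb t) :
    ePartial a b alo ahi blo bhi i0 bhi t := by
  obtain ⟨h1, h2, h3⟩ := hep
  refine ⟨?_, h2, ?_⟩
  · intro i j hi hj hjb2 hl
    simp only [bLex] at hl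
    rcases hl with hl | ⟨hl, hl2⟩
    · exact h1 i j hi hj hjb2 (Or.inl hl)
    · by_cases hjj : j < jb
      · exact h1 i j hi hj hjb2 (Or.inr ⟨hl, hjj⟩)
      · subst hl
        exact hz j (by omega) hjb2
  · intro hk
    obtain ⟨ie, je, u1, u2, u3, u4, u5, u6, u7, u8⟩ := h3 hk
    refine ⟨ie, je, u1, u2, u3, u4, ?_, u6, u7, u8⟩
    simp only [bLex] at u5 ⊢
    omega

lemma dlRow_spec (a b : List Char) (alo ahi blo bhi i0 : Nat)
    (halo : alo ≤ i0) (hia : i0 < ahi) (j2len : PySem.Dict Int Nat)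
    (hk : dHk a b alo blo bhi i0 j2len) :
    ∀ (js : List Nat) (jb : Nat) (nj : PySem.Dict Int Nat) (best : Nat × Nat × Nat),
      blo ≤ jb →
      (∀ j ∈ js, j < blo ∨ jb ≤ j) →
      (∀ j ∈ js, b.getD j ' ' = a.getD i0 ' ') →
      js.Pairwise (· < ·) →
      (∀ j, jb ≤ j → j < bhi → a.getD i0 ' ' = b.getD j ' ' → j ∈ js) →
      dReprRow a b alo blo bhi i0 jb nj →
      ePartial a b alo ahi blo bhi i0 jb best →
      dReprRow a b alo blo bhi i0 bhi (dlRow blo bhi i0 j2len js (nj, best)).1 ∧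
      ePartial a b alo ahi blo bhi i0 bhi (dlRow blo bhi i0 j2len js (nj, best)).2 := by
  intro js
  induction js with
  | nil =>
    intro jb nj best hjb hlo hch hsort hcomp hrepr hep
    rw [dlRow]
    have hz : ∀ j, jb ≤ j → j < bhi → bRl a b alo blo i0 j = 0 := by
      intro j h1 h2
      rw [bRl, if_neg]
      intro hok
      simpa using hcomp j h1 h2 hok
    refine ⟨?_, ?_⟩
    · obtain ⟨hr1, hr2⟩ := hrepr
      refine ⟨?_, hr2⟩
      intro j
      rw [hr1 j]
      split_ifs with u v <;> first
        | rfl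
        | omega
        | (exact (hz j (by omega) (by omega)).symm)
    · exact ePartial_to_bhi a b alo ahi blo bhi i0 jb best
        (fun j h1 h2 => by rw [hz j h1 h2]; omega) hep
  | cons j js ih =>
    intro jb nj best hjb hlo hch hsort hcomp hrepr hep
    obtain ⟨bi0, bj0, bk0⟩ := best
    rw [dlRow]
    dsimp only
    split_ifs with g1 g2 g3
    · -- j < blo: continue
      apply ih jb nj (bi0, bj0, bk0) hjb
        (fun x hx => hlo x (List.mem_cons_of_mem _ hx))
        (fun x hx => hch x (List.mem_cons_of_mem _ hx))
        ((List.pairwise_cons.mp hsort).2)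
        ?_ hrepr hep
      intro j'' h1 h2 hok
      have := hcomp j'' h1 h2 hok
      rcases List.mem_cons.mp this with he | he
      · omega
      · exact he
    · -- bhi ≤ j: break; nothing eligible remains in the window
      have hz : ∀ j'', jb ≤ j'' → j'' < bhi → bRl a b alo blo i0 j'' = 0 := by
        intro j'' h1 h2
        rw [bRl, if_neg]
        intro hok
        have := hcomp j'' h1 h2 hok
        rcases List.mem_cons.mp this with he | he
        · omega
        · have := (List.pairwise_cons.mp hsort).1 j'' he
          omega
      refine ⟨?_, ?_⟩
      · obtain ⟨hr1, hr2⟩ := hrepr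
        refine ⟨?_, hr2⟩
        intro j''
        rw [hr1 j'']
        split_ifs with u v <;> first
          | rfl
          | omega
          | (exact (hz j'' (by omega) (by omega)).symm)
      · exact ePartial_to_bhi a b alo ahi blo bhi i0 jb (bi0, bj0, bk0)
          (fun j'' h1 h2 => by rw [hz j'' h1 h2]; omega) hep
    all_goals (
      -- blo ≤ j < bhi, j matches the row char
      have hjblo : blo ≤ j := by omega
      have hjbhi : j < bhi := by omega
      have hjjb : jb ≤ j := by
        rcases hlo j (List.mem_cons_self ..) with h | h
        · omega
        · exact h
      have hok : a.getD i0 ' ' = b.getD j ' ' := (hch j (List.mem_cons_self ..)).symm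
      have hkval : j2len.getD ((j : Int) - 1) 0 + 1 = bRl a b alo blo i0 j :=
        hk j hjblo hjbhi hok
      have hkpos : 1 ≤ bRl a b alo blo i0 j := bRl_pos_of_ok a b alo blo i0 j hok
      have hgap : ∀ j'', jb ≤ j'' → j'' < j → j'' < bhi → bRl a b alo blo i0 j'' = 0 := by
        intro j'' h1 h2 h3
        rw [bRl, if_neg]
        intro hok2
        have := hcomp j'' h1 h3 hok2
        rcases List.mem_cons.mp this with he | he
        · omega
        · have := (List.pairwise_cons.mp hsort).1 j'' he
          omega
      have hrepr' : dReprRow a b alo blo bhi i0 (j + 1)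
          (nj.insert (j : Int) (j2len.getD ((j : Int) - 1) 0 + 1)) := by
        obtain ⟨hr1, hr2⟩ := hrepr
        constructor
        · intro j''
          rw [PySem.Dict.getD_insert]
          by_cases he : (j'' : Int) = (j : Int)
          · have hje : j'' = j := by exact_mod_cast he
            rw [if_pos he, hje, if_pos ⟨hjblo, hjbhi, by omega⟩]
            exact hkval
          · rw [if_neg he, hr1 j'']
            have hjne : ¬ j'' = j := fun hc => he (by exact_mod_cast hc)
            by_cases hcond : blo ≤ j'' ∧ j'' < bhi ∧ j'' < jb
            · rw [if_pos hcond, if_pos ⟨hcond.1, hcond.2.1, by omega⟩]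
            · rw [if_neg hcond]
              by_cases hcond2 : blo ≤ j'' ∧ j'' < bhi ∧ j'' < j + 1
              · rw [if_pos hcond2]
                exact (hgap j'' (by omega) (by omega) (by omega)).symm
              · rw [if_neg hcond2]
        · intro z hzneg
          rw [PySem.Dict.getD_insert, if_neg (by intro he; omega)]
          exact hr2 z hzneg
      have hnext : ∀ x ∈ js, j + 1 ≤ x := by
        intro x hx
        have := (List.pairwise_cons.mp hsort).1 x hx
        omega
      have hcomp' : ∀ j'', j + 1 ≤ j'' → j'' < bhi → a.getD i0 ' ' = b.getD j'' ' ' → j'' ∈ js := by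
        intro j'' h1 h2 hok2
        have := hcomp j'' (by omega) h2 hok2
        rcases List.mem_cons.mp this with he | he
        · omega
        · exact he
      have hch' := fun x hx => hch x (List.mem_cons_of_mem j hx)
      have hlo' : ∀ x ∈ js, x < blo ∨ j + 1 ≤ x := fun x hx => Or.inr (hnext x hx)
      have hsort' := (List.pairwise_cons.mp hsort).2)
    · -- the run beats the best: new best (i0 + 1 - k, j + 1 - k, k)
      apply ih (j + 1) _ _ (by omega) hlo' hch' hsort' hcomp' hrepr'
      obtain ⟨h1, h2, h3⟩ := hep
      refine ⟨?_, ?_, ?_⟩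
      · intro i j'' hi hj hjb2 hl
        show bRl a b alo blo i j'' ≤ j2len.getD ((j : Int) - 1) 0 + 1
        simp only [bLex] at hl
        rcases hl with hl | ⟨hl, hl2⟩
        · have := h1 i j'' hi hj hjb2 (Or.inl hl)
          simp only at this
          omega
        · subst hl
          by_cases hjj : j'' < jb
          · have := h1 i j'' hi hj hjb2 (Or.inr ⟨rfl, hjj⟩)
            simp only at this
            omega
          · by_cases hje : j'' = j
            · subst hje
              omega
            · rw [hgap j'' (by omega) (by omega) (by omega)]
              omega
      · intro hk0
        exact absurd (show j2len.getD ((j : Int) - 1) 0 + 1 = 0 from hk0) (by omega)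
      · intro _
        refine ⟨i0, j, halo, hia, hjblo, hjbhi, ?_, ?_, ?_, ?_⟩
        · show bLex (i0, j) (i0, j + 1)
          exact Or.inr ⟨rfl, Nat.lt_succ_self j⟩
        · show bRl a b alo blo i0 j = j2len.getD ((j : Int) - 1) 0 + 1
          omega
        · show (i0 + 1 - (j2len.getD ((j : Int) - 1) 0 + 1),
                j + 1 - (j2len.getD ((j : Int) - 1) 0 + 1),
                j2len.getD ((j : Int) - 1) 0 + 1) = _
          rfl
        · intro i j'' hi hj hjb2 hl
          show bRl a b alo blo i j'' < j2len.getD ((j : Int) - 1) 0 + 1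
          simp only [bLex] at hl
          rcases hl with hl | ⟨hl, hl2⟩
          · have := h1 i j'' hi hj hjb2 (Or.inl hl)
            simp only at this
            omega
          · subst hl
            by_cases hjj : j'' < jb
            · have := h1 i j'' hi hj hjb2 (Or.inr ⟨rfl, hjj⟩)
              simp only at this
              omega
            · rw [hgap j'' (by omega) (by omega) (by omega)]
              omega
    · -- no improvement: best kept
      apply ih (j + 1) _ _ (by omega) hlo' hch' hsort' hcomp' hrepr'
      apply ePartial_advance a b alo ahi blo bhi i0 jb (j + 1) (bi0, bj0, bk0) (by omega)
        ?_ hep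
      intro j'' h1 h2 h3
      by_cases hje : j'' = j
      · subst hje
        simp only at g3 ⊢
        omega
      · rw [hgap j'' (by omega) (by omega) (by omega)]
        omega

lemma dlRows_spec (a b : List Char) (alo ahi blo bhi : Nat) (hbl : bhi ≤ b.length) :
    ∀ (n i0 : Nat) (D : PySem.Dict Int Nat) (best : Nat × Nat × Nat), alo ≤ i0 →
      (i0 + n = ahi ∨ (ahi ≤ i0 ∧ n = 0)) →
      dHk a b alo blo bhi i0 D →
      ePartial a b alo ahi blo bhi i0 blo best →
      ePartial a b alo ahi blo bhi ahi blo
        (dlRows a (dlB2j b) blo bhi (List.range' i0 n) (D, best)).2 := by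
  intro n
  induction n with
  | zero =>
    intro i0 D best hi0 hn hk hep
    rcases hn with hn | hn
    · have hie : i0 = ahi := by omega
      subst hie
      simpa [List.range', dlRows] using hep
    · obtain ⟨h1, h2, h3⟩ := hep
      simp only [List.range', dlRows]
      refine ⟨?_, h2, ?_⟩
      · intro i j hi hj hjb hl
        apply h1 i j hi hj hjb
        simp only [bLex] at hl ⊢
        omega
      · intro hkne
        obtain ⟨ie, je, u1, u2, u3, u4, u5, u6, u7, u8⟩ := h3 hkne
        refine ⟨ie, je, u1, u2, u3, u4, ?_, u6, u7, u8⟩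
        simp only [bLex] at u5 ⊢
        omega
  | succ n ih =>
    intro i0 D best hi0 hn hk hep
    have hi0a : i0 < ahi := by omega
    have hrw : List.range' i0 (n + 1) = i0 :: List.range' (i0 + 1) n := by
      simp [List.range'_succ]
    rw [hrw]
    show ePartial a b alo ahi blo bhi ahi blo
      (dlRows a (dlB2j b) blo bhi (List.range' (i0 + 1) n)
        (dlRow blo bhi i0 D ((dlB2j b).getD (a.getD i0 ' ') []) (PySem.Dict.empty, best))).2
    have hjs := b2j_getD b (a.getD i0 ' ')
    have hrow := dlRow_spec a b alo ahi blo bhi i0 hi0 hi0a D hk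
      ((dlB2j b).getD (a.getD i0 ' ') []) blo PySem.Dict.empty best (le_refl _)
      (by
        intro x hx
        omega)
      (by
        intro x hx
        rw [hjs] at hx
        have := List.of_mem_filter hx
        simpa [beq_iff_eq] using this)
      (by
        rw [hjs]
        exact List.Pairwise.sublist List.filter_sublist List.pairwise_lt_range)
      (by
        intro j'' h1 h2 hok
        rw [hjs]
        apply List.mem_filter.mpr
        refine ⟨List.mem_range.mpr (by omega), ?_⟩
        simp [beq_iff_eq]
        exact hok.symm)
      (by
        refine ⟨?_, ?_⟩
        · intro j''
          rw [PySem.Dict.getD_empty, if_neg (by omega)]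
        · intro z _
          rw [PySem.Dict.getD_empty])
      hep
    apply ih (i0 + 1) _ _ (by omega) (by omega)
    · exact dHk_step a b alo blo bhi i0 hi0 _ hrow.1
    · exact ePartial_next_row a b alo ahi blo bhi i0 _ hrow.2

-- best over all run ends = best over all run starts
lemma eToBest (a b : List Char) (alo ahi blo bhi : Nat) (t : Nat × Nat × Nat)
    (hep : ePartial a b alo ahi blo bhi ahi blo t) :
    bIsBest a b alo ahi blo bhi t := by
  obtain ⟨h1, h2, h3⟩ := hep
  have hmax : ∀ i j, alo ≤ i → blo ≤ j → bFr a b ahi bhi i j ≤ t.2.2 := by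
    intro i j hi hj
    by_cases hf : bFr a b ahi bhi i j = 0
    · omega
    · have hab := bFr_pos a b ahi bhi i j hf
      have hfa := bFr_le_a a b ahi bhi (ahi - i) i j rfl
      have hfb := bFr_le_b a b ahi bhi (ahi - i) i j rfl
      have hrl := fr_to_rl a b alo ahi blo bhi i j hi hj hf
      have := h1 (i + bFr a b ahi bhi i j - 1) (j + bFr a b ahi bhi i j - 1)
        (by omega) (by omega) (by omega) (by simp only [bLex]; omega)
      omega
  refine ⟨hmax, h2, ?_⟩
  intro hk
  obtain ⟨ie, je, u1, u2, u3, u4, _, u6, u7, u8⟩ := h3 hk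
  have hrle := bRl_le a b alo blo ie je u1 u3
  have ht1 : t.1 = ie + 1 - t.2.2 := by rw [u7]
  have ht2 : t.2.1 = je + 1 - t.2.2 := by rw [u7]
  have hfrt : bFr a b ahi bhi t.1 t.2.1 = t.2.2 := by
    have hge : t.2.2 ≤ bFr a b ahi bhi t.1 t.2.1 := by
      rw [ht1, ht2, ← u6]
      exact rl_to_fr a b alo ahi blo bhi ie je u1 u3 u2 u4
    have hle2 := hmax t.1 t.2.1 (by omega) (by omega)
    omega
  refine ⟨by omega, by omega, hfrt, ?_⟩
  intro i j hi hj hl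
  by_cases hf0 : bFr a b ahi bhi i j = 0
  · omega
  · have hfk := hmax i j hi hj
    by_cases hlt : bFr a b ahi bhi i j < t.2.2
    · exact hlt
    · exfalso
      have hfe : bFr a b ahi bhi i j = t.2.2 := by omega
      have hrl := fr_to_rl a b alo ahi blo bhi i j hi hj hf0
      have hfa := bFr_le_a a b ahi bhi (ahi - i) i j rfl
      have hfb := bFr_le_b a b ahi bhi (ahi - i) i j rfl
      have hu := u8 (i + bFr a b ahi bhi i j - 1) (j + bFr a b ahi bhi i j - 1)
        (by omega) (by omega) (by omega)
        (by simp only [bLex] at hl ⊢; omega)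
      omega

-- the left extension loop never fires with no junk: the DP already counted it
lemma extL_noop (a b : List Char) (alo ahi blo bhi : Nat) (t : Nat × Nat × Nat)
    (hb : bIsBest a b alo ahi blo bhi t) :
    dlExtL a b alo blo t.1 t.2.1 t.2.2 = (t.1, t.2.1, t.2.2) := by
  obtain ⟨hmax, hz, hw⟩ := hb
  rw [dlExtL, if_neg]
  rintro ⟨c1, c2, c3⟩
  by_cases hk : t.2.2 = 0
  · rw [hz hk] at c1
    simp at c1
  · obtain ⟨w1, w2, w3, w4⟩ := hw hk
    have hfr1 := bFr_pos a b ahi bhi t.1 t.2.1 (by omega)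
    have hstep : bFr a b ahi bhi (t.1 - 1) (t.2.1 - 1) = bFr a b ahi bhi t.1 t.2.1 + 1 := by
      rw [bFr, if_pos ⟨by omega, by omega, c3⟩,
        show t.1 - 1 + 1 = t.1 from by omega, show t.2.1 - 1 + 1 = t.2.1 from by omega]
    have := hmax (t.1 - 1) (t.2.1 - 1) (by omega) (by omega)
    omega

-- the right extension loop never fires either: the run already stopped
lemma extR_noop (a b : List Char) (alo ahi blo bhi : Nat) (t : Nat × Nat × Nat)
    (hb : bIsBest a b alo ahi blo bhi t) :
    dlExtR a b ahi bhi t.1 t.2.1 t.2.2 = t.2.2 := by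
  obtain ⟨hmax, hz, hw⟩ := hb
  rw [dlExtR, if_neg]
  rintro ⟨c1, c2, c3⟩
  by_cases hk : t.2.2 = 0
  · have hta : t.1 = alo := by rw [hz hk]
    have htb : t.2.1 = blo := by rw [hz hk]
    have e1 : t.1 + t.2.2 = t.1 := by omega
    have e2 : t.2.1 + t.2.2 = t.2.1 := by omega
    rw [e1] at c1 c3
    rw [e2] at c2 c3
    have h1 : 1 ≤ bFr a b ahi bhi t.1 t.2.1 := by
      rw [bFr, if_pos ⟨c1, c2, c3⟩]
      omega
    have := hmax t.1 t.2.1 (by omega) (by omega)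
    omega
  · obtain ⟨w1, w2, w3, w4⟩ := hw hk
    exact bFr_stop a b ahi bhi t.2.2 t.1 t.2.1 w3 c1 c2 c3

-- find_longest_match computes exactly what B's direct scan computes
lemma dlFLM_eq_bLongest (a b : List Char) (alo ahi blo bhi : Nat) (hbl : bhi ≤ b.length) :
    dlFLM a b (dlB2j b) alo ahi blo bhi = bLongest a b alo ahi blo bhi := by
  have hep0 : ePartial a b alo ahi blo bhi alo blo (alo, blo, 0) := by
    refine ⟨?_, fun _ => rfl, fun hk => absurd rfl hk⟩
    intro i j hi hj _ hl
    simp only [bLex] at hl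
    omega
  have hrows := dlRows_spec a b alo ahi blo bhi hbl (ahi - alo) alo PySem.Dict.empty
    (alo, blo, 0) (le_refl _) (by omega) (dHk_empty a b alo blo bhi) hep0
  have hbest := eToBest a b alo ahi blo bhi _ hrows
  rw [dlFLM]
  rw [extL_noop a b alo ahi blo bhi _ hbest]
  dsimp only
  rw [extR_noop a b alo ahi blo bhi _ hbest]
  exact bIsBest_unique a b alo ahi blo bhi _ _ hbest (bLongest_best a b alo ahi blo bhi)

-- clean unfoldings of bBlocks
lemma bBlocks_eq_of (a b : List Char) (alo ahi blo bhi bi bj bk : Nat)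
    (hE : bLongest a b alo ahi blo bhi = (bi, bj, bk)) (hk : bk ≠ 0) :
    bBlocks a b alo ahi blo bhi =
      bBlocks a b alo bi blo bj ++ [(bi, bj, bk)] ++
        bBlocks a b (bi + bk) ahi (bj + bk) bhi := by
  rw [bBlocks]
  split
  next bi' bj' bk' hbt =>
    rw [hE] at hbt
    obtain ⟨rfl, rfl, rfl⟩ : bi = bi' ∧ bj = bj' ∧ bk = bk' := by
      have h1 := congrArg Prod.fst hbt
      have h2 := congrArg (fun p => p.2.1) hbt
      have h3 := congrArg (fun p => p.2.2) hbt
      exact ⟨h1, h2, h3⟩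
    rw [dif_pos hk]

lemma bBlocks_eq_zero (a b : List Char) (alo ahi blo bhi : Nat)
    (hE : (bLongest a b alo ahi blo bhi).2.2 = 0) :
    bBlocks a b alo ahi blo bhi = [] := by
  rw [bBlocks]
  split
  next bi' bj' bk' hbt =>
    rw [dif_neg]
    rw [hbt] at hE
    simpa using hE

-- every emitted block is inside its region, nonempty, and a genuine common run
lemma bBlocks_props (a b : List Char) :
    ∀ (fk alo ahi blo bhi : Nat), fk = ahi - alo →
      ∀ x ∈ bBlocks a b alo ahi blo bhi,
        alo ≤ x.1 ∧ x.1 + x.2.2 ≤ ahi ∧ blo ≤ x.2.1 ∧ x.2.1 + x.2.2 ≤ bhi ∧ x.2.2 ≠ 0 ∧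
        (∀ t, t < x.2.2 → a.getD (x.1 + t) ' ' = b.getD (x.2.1 + t) ' ') := by
  intro fk
  induction fk using Nat.strong_induction_on with
  | _ fk ih =>
    intro alo ahi blo bhi hfk x hx
    rcases hE : bLongest a b alo ahi blo bhi with ⟨bi, bj, bk⟩
    by_cases hk : bk ≠ 0
    · have hb := bLongest_bounds a b alo ahi blo bhi
      rw [hE] at hb
      have hbo := hb hk
      dsimp only at hbo
      obtain ⟨hb1, hb2, hb3, hb4⟩ := hbo
      have hbest := bLongest_best a b alo ahi blo bhi
      rw [hE] at hbest
      have hwin := hbest.2.2 hk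
      dsimp only at hwin
      have hfr : bFr a b ahi bhi bi bj = bk := hwin.2.2.1
      rw [bBlocks_eq_of a b alo ahi blo bhi bi bj bk hE hk] at hx
      simp only [List.mem_append, List.mem_singleton] at hx
      rcases hx with (hx | hx) | hx
      · have := ih (bi - alo) (by omega) alo bi blo bj rfl x hx
        refine ⟨this.1, by omega, this.2.2.1, by omega, this.2.2.2.2.1, this.2.2.2.2.2⟩
      · subst hx
        dsimp only
        refine ⟨by omega, by omega, by omega, by omega, hk, ?_⟩
        intro t ht
        exact bFr_run a b ahi bhi (ahi - bi) bi bj rfl t (by omega)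
      · have := ih (ahi - (bi + bk)) (by omega) (bi + bk) ahi (bj + bk) bhi rfl x hx
        refine ⟨by omega, this.2.1, by omega, this.2.2.2.1, this.2.2.2.2.1, this.2.2.2.2.2⟩
    · rw [bBlocks_eq_zero a b alo ahi blo bhi (by rw [hE]; simpa using hk)] at hx
      simp at hx

-- blocks come out in order, strictly advancing in both strings
lemma bBlocks_before (a b : List Char) :
    ∀ (fk alo ahi blo bhi : Nat), fk = ahi - alo →
      (bBlocks a b alo ahi blo bhi).Pairwise dlBefore := by
  intro fk
  induction fk using Nat.strong_induction_on with
  | _ fk ih =>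
    intro alo ahi blo bhi hfk
    rcases hE : bLongest a b alo ahi blo bhi with ⟨bi, bj, bk⟩
    by_cases hk : bk ≠ 0
    · have hb := bLongest_bounds a b alo ahi blo bhi
      rw [hE] at hb
      have hbo := hb hk
      dsimp only at hbo
      obtain ⟨hb1, hb2, hb3, hb4⟩ := hbo
      rw [bBlocks_eq_of a b alo ahi blo bhi bi bj bk hE hk]
      rw [List.append_assoc, List.singleton_append, List.pairwise_append]
      refine ⟨ih (bi - alo) (by omega) alo bi blo bj rfl, ?_, ?_⟩
      · rw [List.pairwise_cons]
        refine ⟨?_, ih (ahi - (bi + bk)) (by omega) (bi + bk) ahi (bj + bk) bhi rfl⟩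
        intro v hv
        have := bBlocks_props a b (ahi - (bi + bk)) (bi + bk) ahi (bj + bk) bhi rfl v hv
        show bi + bk ≤ v.1 ∧ bj + bk ≤ v.2.1
        exact ⟨by omega, by omega⟩
      · intro u hu v hv
        have hup := bBlocks_props a b (bi - alo) alo bi blo bj rfl u hu
        rcases List.mem_cons.mp hv with rfl | hv
        · show u.1 + u.2.2 ≤ bi ∧ u.2.1 + u.2.2 ≤ bj
          exact ⟨by omega, by omega⟩
        · have hvp := bBlocks_props a b (ahi - (bi + bk)) (bi + bk) ahi (bj + bk) bhi rfl v hv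
          show u.1 + u.2.2 ≤ v.1 ∧ u.2.1 + u.2.2 ≤ v.2.1
          exact ⟨by omega, by omega⟩
    · rw [bBlocks_eq_zero a b alo ahi blo bhi (by rw [hE]; simpa using hk)]
      exact List.Pairwise.nil

lemma bBlocks_sorted (a b : List Char) (alo ahi blo bhi : Nat) :
    (bBlocks a b alo ahi blo bhi).Pairwise dlLexLe := by
  have hb := bBlocks_before a b (ahi - alo) alo ahi blo bhi rfl
  have hp := bBlocks_props a b (ahi - alo) alo ahi blo bhi rfl
  refine List.Pairwise.imp_of_mem ?_ hb
  intro u v hu hv huv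
  have hu0 := (hp u hu).2.2.2.2.1
  obtain ⟨h1, h2⟩ := huv
  rw [dlLexLe_iff]
  omega

-- no two consecutive blocks are adjacent (else the earlier region had a longer match)
lemma bBlocks_chain (a b : List Char) :
    ∀ (fk alo ahi blo bhi : Nat), fk = ahi - alo →
      List.IsChain (fun u v => ¬(u.1 + u.2.2 = v.1 ∧ u.2.1 + u.2.2 = v.2.1))
        (bBlocks a b alo ahi blo bhi) := by
  intro fk
  induction fk using Nat.strong_induction_on with
  | _ fk ih =>
    intro alo ahi blo bhi hfk
    rcases hE : bLongest a b alo ahi blo bhi with ⟨bi, bj, bk⟩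
    by_cases hk : bk ≠ 0
    · have hb := bLongest_bounds a b alo ahi blo bhi
      rw [hE] at hb
      have hbo := hb hk
      dsimp only at hbo
      obtain ⟨hb1, hb2, hb3, hb4⟩ := hbo
      have hbest := bLongest_best a b alo ahi blo bhi
      rw [hE] at hbest
      have hmax : ∀ i j, alo ≤ i → blo ≤ j → bFr a b ahi bhi i j ≤ bk := hbest.1
      have hwin := hbest.2.2 hk
      dsimp only at hwin
      have hfr : bFr a b ahi bhi bi bj = bk := hwin.2.2.1
      have hrunx : ∀ t, t < bk → a.getD (bi + t) ' ' = b.getD (bj + t) ' ' := by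
        intro t ht
        exact bFr_run a b ahi bhi (ahi - bi) bi bj rfl t (by omega)
      rw [bBlocks_eq_of a b alo ahi blo bhi bi bj bk hE hk]
      rw [List.append_assoc, List.isChain_append]
      refine ⟨ih (bi - alo) (by omega) alo bi blo bj rfl, ?_, ?_⟩
      · rw [List.singleton_append, List.isChain_cons]
        refine ⟨?_, ih (ahi - (bi + bk)) (by omega) (bi + bk) ahi (bj + bk) bhi rfl⟩
        intro v hv
        have hvmem := List.mem_of_mem_head? hv
        have hvp := bBlocks_props a b (ahi - (bi + bk)) (bi + bk) ahi (bj + bk) bhi rfl v hvmem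
        rintro ⟨e1, e2⟩
        dsimp only at e1 e2
        -- the combined run (bi, bj) of length bk + v.2.2 beats bk
        have hcomb : bk + v.2.2 ≤ bFr a b ahi bhi bi bj := by
          apply bFr_max
          · intro t ht
            by_cases htk : t < bk
            · exact hrunx t htk
            · have := hvp.2.2.2.2.2 (t - bk) (by omega)
              have e3 : v.1 + (t - bk) = bi + t := by omega
              have e4 : v.2.1 + (t - bk) = bj + t := by omega
              rwa [e3, e4] at this
          · omega
          · omega
        have := hmax bi bj (by omega) (by omega)
        have hvk := hvp.2.2.2.2.1
        omega
      · intro u hu v hv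
        have humem := List.mem_of_mem_getLast? hu
        have hup := bBlocks_props a b (bi - alo) alo bi blo bj rfl u humem
        have hvhead : v = (bi, bj, bk) := by
          have h := hv
          simp at h
          exact h.symm
        subst hvhead
        rintro ⟨e1, e2⟩
        dsimp only at e1 e2
        have hcomb : u.2.2 + bk ≤ bFr a b ahi bhi u.1 u.2.1 := by
          apply bFr_max
          · intro t ht
            by_cases htk : t < u.2.2
            · exact hup.2.2.2.2.2 t htk
            · have := hrunx (t - u.2.2) (by omega)
              have e3 : bi + (t - u.2.2) = u.1 + t := by omega
              have e4 : bj + (t - u.2.2) = u.2.1 + t := by omega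
              rwa [e3, e4] at this
          · omega
          · omega
        have := hmax u.1 u.2.1 (by omega) (by omega)
        have huk := hup.2.2.2.2.1
        omega
    · rw [bBlocks_eq_zero a b alo ahi blo bhi (by rw [hE]; simpa using hk)]
      exact List.IsChain.nil

-- dlMerge is the identity on a chain of nonempty, non-adjacent blocks
lemma dlMerge_id :
    ∀ (xs : List (Nat × Nat × Nat)) (i2 j2 k2 : Nat), k2 ≠ 0 →
      (∀ x ∈ xs, x.2.2 ≠ 0) →
      List.IsChain (fun u v => ¬(u.1 + u.2.2 = v.1 ∧ u.2.1 + u.2.2 = v.2.1))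
        ((⟨i2, j2, k2⟩ : Nat × Nat × Nat) :: xs) →
      dlMerge xs i2 j2 k2 = (i2, j2, k2) :: xs := by
  intro xs
  induction xs with
  | nil =>
    intro i2 j2 k2 hk _ _
    rw [dlMerge, if_pos hk]
  | cons y ys ih =>
    intro i2 j2 k2 hk hall hch
    obtain ⟨y1, y2, y3⟩ := y
    rw [dlMerge]
    have hna : ¬(i2 + k2 = y1 ∧ j2 + k2 = y2) := (List.isChain_cons_cons.mp hch).1
    rw [if_neg hna, if_pos hk]
    rw [ih y1 y2 y3 (hall _ (List.mem_cons_self ..))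
      (fun x hx => hall x (List.mem_cons_of_mem _ hx)) (List.isChain_cons_cons.mp hch).2]
    rfl

lemma dlMerge_noop (xs : List (Nat × Nat × Nat))
    (hall : ∀ x ∈ xs, x.2.2 ≠ 0)
    (hch : List.IsChain (fun u v => ¬(u.1 + u.2.2 = v.1 ∧ u.2.1 + u.2.2 = v.2.1)) xs) :
    dlMerge xs 0 0 0 = xs := by
  cases xs with
  | nil => rw [dlMerge]; simp
  | cons y ys =>
    obtain ⟨y1, y2, y3⟩ := y
    have hk := hall _ (List.mem_cons_self ..)
    rw [dlMerge]
    by_cases hm : 0 + 0 = y1 ∧ 0 + 0 = y2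
    · rw [if_pos hm]
      have h1 : y1 = 0 := by omega
      have h2 : y2 = 0 := by omega
      subst h1 h2
      rw [show (0 : Nat) + y3 = y3 from by omega]
      exact dlMerge_id ys 0 0 y3 hk (fun x hx => hall x (List.mem_cons_of_mem _ hx)) hch
    · rw [if_neg hm, if_neg (by omega)]
      rw [dlMerge_id ys y1 y2 y3 hk (fun x hx => hall x (List.mem_cons_of_mem _ hx)) hch]
      rfl

-- the queue traversal emits, as a multiset, exactly the greedy recursion's blocks
lemma dlQueue_perm (a b : List Char) :
    ∀ (fuel : Nat) (q : List (Nat × Nat × Nat × Nat)) (acc : List (Nat × Nat × Nat)),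
      (∀ r ∈ q, r.2.2.2 ≤ b.length) →
      (q.map (fun r => 2 * (r.2.1 - r.1) + 1)).sum ≤ fuel →
      (dlQueue a b (dlB2j b) fuel q acc).Perm
        (acc ++ q.flatMap (fun r => bBlocks a b r.1 r.2.1 r.2.2.1 r.2.2.2)) := by
  intro fuel
  induction fuel with
  | zero =>
    intro q acc hq hm
    match q with
    | [] => simp [dlQueue]
    | r :: qt =>
      exfalso
      simp [List.map_cons, List.sum_cons] at hm
  | succ fuel ih =>
    intro q acc hq hm
    match q with
    | [] => simp [dlQueue]
    | (alo, ahi, blo, bhi) :: qt =>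
      have hbhi : bhi ≤ b.length := hq _ (List.mem_cons_self ..)
      have hx : dlFLM a b (dlB2j b) alo ahi blo bhi = bLongest a b alo ahi blo bhi :=
        dlFLM_eq_bLongest a b alo ahi blo bhi hbhi
      rcases hE : bLongest a b alo ahi blo bhi with ⟨bi, bj, bk⟩
      rw [dlQueue]
      dsimp only
      rw [hx, hE]
      dsimp only
      rw [List.flatMap_cons]
      dsimp only
      simp only [List.map_cons, List.sum_cons] at hm
      by_cases hk : bk ≠ 0
      · have hb := bLongest_bounds a b alo ahi blo bhi
        rw [hE] at hb
        have hbo := hb hk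
        dsimp only at hbo
        obtain ⟨hb1, hb2, hb3, hb4⟩ := hbo
        rw [if_pos hk]
        rw [bBlocks_eq_of a b alo ahi blo bhi bi bj bk hE hk]
        set q2 := if bi + bk < ahi ∧ bj + bk < bhi then [(bi + bk, ahi, bj + bk, bhi)] else []
          with hq2
        set q1 := if alo < bi ∧ blo < bj then [(alo, bi, blo, bj)] else [] with hq1
        have hIH := ih (q2 ++ q1 ++ qt) (acc ++ [(bi, bj, bk)])
          (by
            intro r hr
            simp only [List.mem_append] at hr
            rcases hr with (hr | hr) | hr
            · rw [hq2] at hr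
              split_ifs at hr with hg
              · simp at hr; subst hr; exact hbhi
              · simp at hr
            · rw [hq1] at hr
              split_ifs at hr with hg
              · simp at hr; subst hr
                dsimp only
                omega
              · simp at hr
            · exact hq r (List.mem_cons_of_mem _ hr))
          (by
            have hs2 : (q2.map (fun r => 2 * (r.2.1 - r.1) + 1)).sum ≤
                2 * (ahi - (bi + bk)) + 1 := by
              rw [hq2]
              split_ifs <;> simp
            have hs1 : (q1.map (fun r => 2 * (r.2.1 - r.1) + 1)).sum ≤
                2 * (bi - alo) + 1 := by
              rw [hq1]
              split_ifs <;> simp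
            rw [List.map_append, List.sum_append, List.map_append, List.sum_append]
            omega)
        refine hIH.trans ?_
        rw [List.append_assoc q2 q1 qt, List.flatMap_append, List.flatMap_append]
        have hfq2 : q2.flatMap (fun r => bBlocks a b r.1 r.2.1 r.2.2.1 r.2.2.2) =
            bBlocks a b (bi + bk) ahi (bj + bk) bhi := by
          rw [hq2]
          split_ifs with hg
          · simp
          · rw [bBlocks_eq_zero a b (bi + bk) ahi (bj + bk) bhi ?_]
            · simp
            · rcases hE2 : bLongest a b (bi + bk) ahi (bj + bk) bhi with ⟨ci, cj, ck⟩
              by_contra hck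
              have hb2 := bLongest_bounds a b (bi + bk) ahi (bj + bk) bhi
              rw [hE2] at hb2
              have := hb2 (by simpa using hck)
              dsimp only at this ⊢
              omega
        have hfq1 : q1.flatMap (fun r => bBlocks a b r.1 r.2.1 r.2.2.1 r.2.2.2) =
            bBlocks a b alo bi blo bj := by
          rw [hq1]
          split_ifs with hg
          · simp
          · rw [bBlocks_eq_zero a b alo bi blo bj ?_]
            · simp
            · rcases hE2 : bLongest a b alo bi blo bj with ⟨ci, cj, ck⟩
              by_contra hck
              have hb2 := bLongest_bounds a b alo bi blo bj
              rw [hE2] at hb2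
              have := hb2 (by simpa using hck)
              dsimp only at this ⊢
              omega
        rw [hfq2, hfq1]
        -- acc ++ [x] ++ right ++ left ++ rest  ~  acc ++ (left ++ [x] ++ right ++ rest)
        simp only [List.append_assoc]
        apply List.Perm.append_left acc
        have h1 : ([(bi, bj, bk)] ++ (bBlocks a b (bi + bk) ahi (bj + bk) bhi ++
            (bBlocks a b alo bi blo bj ++
              qt.flatMap (fun r => bBlocks a b r.1 r.2.1 r.2.2.1 r.2.2.2)))) =
            (([(bi, bj, bk)] ++ bBlocks a b (bi + bk) ahi (bj + bk) bhi) ++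
              bBlocks a b alo bi blo bj) ++
              qt.flatMap (fun r => bBlocks a b r.1 r.2.1 r.2.2.1 r.2.2.2) := by
          simp [List.append_assoc]
        have h2 : (bBlocks a b alo bi blo bj ++
            ([(bi, bj, bk)] ++ (bBlocks a b (bi + bk) ahi (bj + bk) bhi ++
              qt.flatMap (fun r => bBlocks a b r.1 r.2.1 r.2.2.1 r.2.2.2)))) =
            (bBlocks a b alo bi blo bj ++
              ([(bi, bj, bk)] ++ bBlocks a b (bi + bk) ahi (bj + bk) bhi)) ++
              qt.flatMap (fun r => bBlocks a b r.1 r.2.1 r.2.2.1 r.2.2.2) := by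
          simp [List.append_assoc]
        rw [h1, h2]
        exact List.Perm.append_right _ List.perm_append_comm
      · rw [if_neg hk]
        have hIH := ih qt acc (fun r hr => hq r (List.mem_cons_of_mem _ hr)) (by omega)
        refine hIH.trans ?_
        rw [bBlocks_eq_zero a b alo ahi blo bhi (by rw [hE]; simpa using hk)]
        simp

-- A's matching blocks equal B's greedy recursion (with the terminating block)
lemma blocks_eq (a b : List Char) :
    dlMatchingBlocks a b = bBlocks a b 0 a.length 0 b.length ++ [(a.length, b.length, 0)] := by
  show dlMerge (dlSort (dlQueue a b (dlB2j b) (2 * a.length + 2)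
      [(0, a.length, 0, b.length)] [])) 0 0 0 ++ [(a.length, b.length, 0)] = _
  have hperm0 := dlQueue_perm a b (2 * a.length + 2) [(0, a.length, 0, b.length)] []
    (by
      intro r hr
      simp at hr
      subst hr
      exact le_refl _)
    (by
      simp only [List.map_cons, List.map_nil, List.sum_cons, List.sum_nil]
      omega)
  have hperm : (dlQueue a b (dlB2j b) (2 * a.length + 2)
      [(0, a.length, 0, b.length)] []).Perm (bBlocks a b 0 a.length 0 b.length) := by
    simpa using hperm0
  have hall : ∀ x ∈ bBlocks a b 0 a.length 0 b.length, x.2.2 ≠ 0 :=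
    fun x hx => (bBlocks_props a b (a.length - 0) 0 a.length 0 b.length rfl x hx).2.2.2.2.1
  have hsorted := bBlocks_sorted a b 0 a.length 0 b.length
  have hchain := bBlocks_chain a b (a.length - 0) 0 a.length 0 b.length rfl
  have hsort_eq : dlSort (dlQueue a b (dlB2j b) (2 * a.length + 2)
      [(0, a.length, 0, b.length)] []) = bBlocks a b 0 a.length 0 b.length :=
    List.eq_of_perm_of_sorted
      (fun x y _ _ h1 h2 => by
        rw [dlLexLe_iff] at h1 h2
        obtain ⟨x1, x2, x3⟩ := x
        obtain ⟨y1, y2, y3⟩ := y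
        simp only at h1 h2
        have e1 : x1 = y1 := by omega
        have e2 : x2 = y2 := by omega
        have e3 : x3 = y3 := by omega
        rw [e1, e2, e3])
      (dlSort_pairwise _) hsorted ((dlSort_perm _).trans hperm)
  rw [hsort_eq, dlMerge_noop _ hall hchain]

-- ===== VERDICT (by name: the statement is the Claim_ definition above) =====
theorem added_chars_py_spec : Claim_equal_added_chars_py := by
  intro old new _
  unfold Spec_added_chars_py added_chars_py added_chars_py_alt
  have hg := matchingBlocks_good old.toList new.toList
  rw [foldA_eq new.toList (dlMatchingBlocks old.toList new.toList) 0 0 0 [] hg]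
  rw [blocks_eq old.toList new.toList]
  simp [sumSizes_eq]
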